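-- pv_equiv track=rewrite | github.com/loociano/advent-of-code | aoc2022/src/day12/python/solution.py | min_steps_to_top
-- ===== SOURCE A (Python) =====
-- from collections import defaultdict, deque
-- from typing import Dict, List, Tuple, TypeAlias
--
-- Coord: TypeAlias = Tuple[int, int]
--
-- Graph: TypeAlias = Dict[Coord, List[Coord]]
--
-- def _build_graph(grid: Tuple[Tuple[str, ...]]) -> Tuple[Graph, Coord, Coord]:
--   graph = defaultdict(list)
--   start = None
--   end = None
--   for row in range(len(grid)):
--     for col in range(len(grid[0])):
--       point = (row, col)
--       value = grid[row][col]
--       if value == 'S':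
--         start = point
--         height = ord('a')
--       elif value == 'E':
--         end = point
--         height = ord('z')
--       else:
--         height = ord(value)
--       neighbours = (
--         (row - 1, col),  # Up
--         (row, col + 1),  # Right
--         (row + 1, col),  # Down
--         (row, col - 1),  # Left
--       )
--       for neighbour_row, neighbour_col in neighbours:
--         if (neighbour_row < 0
--             or neighbour_row >= len(grid)
--             or neighbour_col < 0
--             or neighbour_col >= len(grid[0])):
--           continue
--         neighbour_value = grid[neighbour_row][neighbour_col]
--         if neighbour_value == 'S':
--           neighbour_height = ord('a')
--         elif neighbour_value == 'E':
--           neighbour_height = ord('z')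
--         else:
--           neighbour_height = ord(neighbour_value)
--         if neighbour_height - height <= 1:
--           graph[point].append((neighbour_row, neighbour_col))
--   return graph, start, end
--
-- def _bfs(graph: Graph, start: Coord, end: Coord) -> int:
--   shortest_path_seen = {start: 0}
--   queue = deque()
--   queue.append((start, 0))
--   while len(queue):
--     current_position, steps = queue.popleft()
--     current_steps = steps + 1
--     for neighbour in graph[current_position]:
--       if (
--           neighbour not in shortest_path_seen
--           or current_steps < shortest_path_seen[neighbour]
--       ):
--         shortest_path_seen[neighbour] = current_steps
--         if neighbour != end:
--           queue.append((neighbour, current_steps))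
--   if shortest_path_seen.get(end) is None:
--     # Top cannot be reached from every point.
--     return 100_000_000
--   return shortest_path_seen[end]
--
-- def _find_coords(grid: Tuple[Tuple[str, ...]],
--                  search: str = 'a') -> List[Coord]:
--   result = []
--   for row in range(len(grid)):
--     for col in range(len(grid[0])):
--       if grid[row][col] == search:
--         result.append((row, col))
--   return result
--
-- def min_steps_to_top(heightmap: Tuple[Tuple[str, ...]],
--                      start_char: str = 'S') -> int:
--   grid = tuple([tuple(list(line)) for line in heightmap])
--   graph, start, end = _build_graph(grid)
--   if start_char != 'S':
--     starting_coords = _find_coords(grid=grid, search=start_char) + [start]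
--     return min([_bfs(graph=graph, start=start_coord, end=end)
--                 for start_coord in starting_coords])
--   return _bfs(graph=graph, start=start, end=end)
-- ===== SOURCE B (Python) =====
-- UNREACHABLE = 100_000_000
--
--
-- def min_steps_to_top(heightmap, start_char='S'):
--   """One layered BFS backwards from the summit over the reversed climbing
--   relation builds the whole distance map; each candidate start is then a
--   dictionary lookup, instead of a full BFS per candidate."""
--   rows = [list(line) for line in heightmap]
--   h = len(rows)
--   w = len(rows[0]) if h else 0
--
--   def height(ch):
--     if ch == 'S':
--       return ord('a')
--     if ch == 'E':
--       return ord('z')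
--     return ord(ch)
--
--   start = None
--   end = None
--   for r in range(h):
--     for c in range(w):
--       if rows[r][c] == 'S':
--         start = (r, c)
--       elif rows[r][c] == 'E':
--         end = (r, c)
--
--   dist = {end: 0}
--   if end is not None:
--     frontier = [end]
--     steps = 0
--     while frontier:
--       steps += 1
--       nxt = []
--       for (r, c) in frontier:
--         for (nr, nc) in ((r - 1, c), (r, c + 1), (r + 1, c), (r, c - 1)):
--           if (0 <= nr < h and 0 <= nc < w and (nr, nc) not in dist
--               and height(rows[r][c]) - height(rows[nr][nc]) <= 1):
--             dist[(nr, nc)] = steps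
--             nxt.append((nr, nc))
--       frontier = nxt
--
--   best = dist.get(start, UNREACHABLE)
--   if start_char == 'S':
--     return best
--   for r in range(h):
--     for c in range(w):
--       if rows[r][c] == start_char and dist.get((r, c), UNREACHABLE) < best:
--         best = dist.get((r, c), UNREACHABLE)
--   return best
-- ===== Notes on version B (the rewrite author's own statement) =====
-- stated objective: faster
-- what changed: A builds an explicit adjacency dict and runs a separate queue-based BFS from every candidate start cell; B runs a single layered BFS backwards from the end cell over the reversed climbing relation, producing one distance map, and then reads each candidate's answer off with a dictionary lookup.
import Mathlib
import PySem

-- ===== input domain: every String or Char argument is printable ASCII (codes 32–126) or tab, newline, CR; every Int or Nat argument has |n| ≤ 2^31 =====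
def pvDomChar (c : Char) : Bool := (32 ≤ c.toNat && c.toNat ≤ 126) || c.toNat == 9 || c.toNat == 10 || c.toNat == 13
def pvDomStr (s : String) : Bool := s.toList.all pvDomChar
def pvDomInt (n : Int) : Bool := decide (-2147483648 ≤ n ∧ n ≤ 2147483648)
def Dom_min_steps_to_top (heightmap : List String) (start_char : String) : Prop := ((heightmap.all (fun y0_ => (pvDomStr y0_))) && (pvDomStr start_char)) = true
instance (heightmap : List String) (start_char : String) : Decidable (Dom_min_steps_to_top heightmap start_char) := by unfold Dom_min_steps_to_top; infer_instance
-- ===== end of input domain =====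

-- B replaces A's one-BFS-per-candidate-start-cell by a single layered BFS backwards
-- from the end cell (one distance map, candidates become lookups): asymptotically faster.

abbrev pvC : Type := Int × Int

-- ===== PORT A =====

-- height of a cell character ('S' counts as 'a', 'E' as 'z'), as in both Pythons
def pvHeight (c : Char) : Int :=
  if c = 'S' then 97 else if c = 'E' then 122 else (c.toNat : Int)

-- grid[r][c]; the default is never reached on inputs satisfying Pre_ (every index
-- that the programs use is in range there)
def pvAt (g : List (List Char)) (r c : Int) : Char :=
  (PySem.List.pyGet? ((PySem.List.pyGet? g r).getD []) c).getD '?'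

-- the four neighbour coordinates, in the order both Pythons list them
def pvNbrs (p : pvC) : List pvC :=
  [(p.1 - 1, p.2), (p.1, p.2 + 1), (p.1 + 1, p.2), (p.1, p.2 - 1)]

-- the start/end bookkeeping of one grid cell (the 'S'/'E' if/elif both Pythons have)
def pvScanCell (g : List (List Char)) (row col : Int) (se : Option pvC × Option pvC) :
    Option pvC × Option pvC :=
  let value := pvAt g row col
  if value = 'S' then (some (row, col), se.2)
  else if value = 'E' then (se.1, some (row, col))
  else se

-- the graph edges added for one grid cell in A's _build_graph
def pvGraphCell (g : List (List Char)) (H W row col : Int)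
    (gr : PySem.Dict (Option pvC) (List pvC)) : PySem.Dict (Option pvC) (List pvC) :=
  let height := pvHeight (pvAt g row col)
  (pvNbrs (row, col)).foldl (fun gr nb =>
    if nb.1 < 0 ∨ H ≤ nb.1 ∨ nb.2 < 0 ∨ W ≤ nb.2 then gr
    else if pvHeight (pvAt g nb.1 nb.2) - height ≤ 1 then
      gr.insert (some (row, col)) (gr.getD (some (row, col)) [] ++ [nb])
    else gr) gr

-- A's _build_graph (the dict is a defaultdict(list); `start`/`end` keep the last hit)
def pvBuildGraph (g : List (List Char)) :
    PySem.Dict (Option pvC) (List pvC) × (Option pvC × Option pvC) :=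
  let H : Int := (g.length : Int)
  (PySem.List.pyRange 0 H 1).foldl (fun st row =>
    let W : Int := ((g.headD []).length : Int)
    (PySem.List.pyRange 0 W 1).foldl (fun st col =>
      (pvGraphCell g H W row col st.1, pvScanCell g row col st.2)) st)
    (PySem.Dict.empty, (none, none))

-- A's _bfs while-loop (fuel bounds the number of pops; h*w+2 pops always suffice,
-- which the equivalence proof establishes)
def pvBfsLoop (graph : PySem.Dict (Option pvC) (List pvC)) (e : Option pvC) :
    Nat → List (Option pvC × Int) → PySem.Dict (Option pvC) Int →
    PySem.Dict (Option pvC) Int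
  | 0, _, seen => seen
  | _ + 1, [], seen => seen
  | fuel + 1, (pos, steps) :: rest, seen =>
    let cs := steps + 1
    let st := (graph.getD pos []).foldl (fun st n =>
      if (match st.2.get? (some n) with
          | none => true
          | some v => decide (cs < v)) = true then
        let seen' := st.2.insert (some n) cs
        if some n ≠ e then (st.1 ++ [(some n, cs)], seen') else (st.1, seen')
      else st) (rest, seen)
    pvBfsLoop graph e fuel st.1 st.2

-- A's _bfs
def pvBfs (hw : Nat) (graph : PySem.Dict (Option pvC) (List pvC))
    (s e : Option pvC) : Int :=
  let seen := pvBfsLoop graph e (hw + 2) [(s, 0)] (PySem.Dict.empty.insert s 0)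
  match seen.get? e with
  | none => 100000000
  | some v => v

-- A's _find_coords
def pvFindCoords (g : List (List Char)) (search : String) : List pvC :=
  let H : Int := (g.length : Int)
  (PySem.List.pyRange 0 H 1).foldl (fun res row =>
    let W : Int := ((g.headD []).length : Int)
    (PySem.List.pyRange 0 W 1).foldl (fun res col =>
      if String.ofList [pvAt g row col] = search then res ++ [(row, col)] else res) res) []

def min_steps_to_top (heightmap : List String) (start_char : String) : Int :=
  let grid : List (List Char) := heightmap.map (fun line => line.toList)
  let hw : Nat := grid.length * (grid.headD []).length
  let r := pvBuildGraph grid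
  let graph := r.1
  let s := r.2.1
  let e := r.2.2
  if start_char ≠ "S" then
    let starting : List (Option pvC) := (pvFindCoords grid start_char).map some ++ [s]
    -- Python's min(...) of a list that is nonempty by construction (s is appended)
    (PySem.List.min? (starting.map (fun c => pvBfs hw graph c e)) (fun x => x)).getD 0
  else pvBfs hw graph s e

-- ===== PORT B =====

-- B's while-loop: layered BFS backwards from the end cell, filling the distance
-- dict (fuel bounds the number of layers; h*w+2 layers always suffice)
def pvRevBfs (g : List (List Char)) (H W : Int) :
    Nat → PySem.Dict (Option pvC) Int → List pvC → Int → PySem.Dict (Option pvC) Int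
  | 0, dist, _, _ => dist
  | fuel + 1, dist, frontier, steps =>
    if frontier.isEmpty then dist
    else
      let steps' := steps + 1
      let st := frontier.foldl (fun st p =>
        (pvNbrs p).foldl (fun st nb =>
          if 0 ≤ nb.1 ∧ nb.1 < H ∧ 0 ≤ nb.2 ∧ nb.2 < W ∧
              st.1.contains (some nb) = false ∧
              pvHeight (pvAt g p.1 p.2) - pvHeight (pvAt g nb.1 nb.2) ≤ 1 then
            (st.1.insert (some nb) steps', st.2 ++ [nb])
          else st) st) (dist, ([] : List pvC))
      pvRevBfs g H W fuel st.1 st.2 steps'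

def min_steps_to_top_alt (heightmap : List String) (start_char : String) : Int :=
  let rows : List (List Char) := heightmap.map (fun line => line.toList)
  let H : Int := (rows.length : Int)
  let W : Int := if 0 < rows.length then ((rows.headD []).length : Int) else 0
  let se := (PySem.List.pyRange 0 H 1).foldl (fun se row =>
    (PySem.List.pyRange 0 W 1).foldl (fun se col => pvScanCell rows row col se) se)
    (none, none)
  -- dist = {end: 0}, then (if an end cell exists) the backward BFS fills it in
  let dist0 : PySem.Dict (Option pvC) Int := PySem.Dict.empty.insert se.2 0
  let dist : PySem.Dict (Option pvC) Int :=
    match se.2 with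
    | none => dist0
    | some en => pvRevBfs rows H W (rows.length * (rows.headD []).length + 2) dist0 [en] 0
  let best : Int := dist.getD se.1 100000000
  if start_char = "S" then best
  else
    (PySem.List.pyRange 0 H 1).foldl (fun best row =>
      (PySem.List.pyRange 0 W 1).foldl (fun best col =>
        if String.ofList [pvAt rows row col] = start_char ∧
            dist.getD (some (row, col)) 100000000 < best then
          dist.getD (some (row, col)) 100000000
        else best) best) best

-- ===== PRECONDITION & SPEC =====
-- The Python programs index every row at the columns 0..len(row 0)-1, so both raise
-- IndexError exactly when some row is shorter than the first row; Pre_ excludes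
-- precisely those inputs (A returns normally on every other input).
def Pre_min_steps_to_top (heightmap : List String) (start_char : String) : Prop :=
  ∀ row ∈ heightmap, (heightmap.headD "").length ≤ row.length

instance (heightmap : List String) (start_char : String) :
    Decidable (Pre_min_steps_to_top heightmap start_char) := by
  unfold Pre_min_steps_to_top; infer_instance

def pvWitness_min_steps_to_top : List String × String := (["Sb", "aE"], "a")

def Spec_min_steps_to_top (heightmap : List String) (start_char : String) (out : Int) : Prop := out = min_steps_to_top_alt heightmap start_char
instance (heightmap : List String) (start_char : String) (out : Int) : Decidable (Spec_min_steps_to_top heightmap start_char out) := by unfold Spec_min_steps_to_top; infer_instance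

-- ===== CLAIM (what is proved, stated in full; the proof is below) =====
def Claim_equal_min_steps_to_top : Prop := ∀ (heightmap : List String) (start_char : String), Dom_min_steps_to_top heightmap start_char → Pre_min_steps_to_top heightmap start_char → Spec_min_steps_to_top heightmap start_char (min_steps_to_top heightmap start_char)

-- ===== LEMMAS AND PROOFS =====

-- ---------- grid-level notions used only by the proofs ----------

def pvHg (g : List (List Char)) : Int := (g.length : Int)
def pvWg (g : List (List Char)) : Int := ((g.headD []).length : Int)

def pvCells (g : List (List Char)) : List pvC :=
  (PySem.List.pyRange 0 (pvHg g) 1).product (PySem.List.pyRange 0 (pvWg g) 1)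

def pvInB (g : List (List Char)) (p : pvC) : Prop :=
  0 ≤ p.1 ∧ p.1 < pvHg g ∧ 0 ≤ p.2 ∧ p.2 < pvWg g

def pvHtAt (g : List (List Char)) (p : pvC) : Int := pvHeight (pvAt g p.1 p.2)

def pvAdj (g : List (List Char)) (p q : pvC) : Prop :=
  pvInB g p ∧ pvInB g q ∧ q ∈ pvNbrs p ∧ pvHtAt g q - pvHtAt g p ≤ 1

def pvAdjList (g : List (List Char)) (p : pvC) : List pvC :=
  (pvNbrs p).filter (fun nb =>
    decide (0 ≤ nb.1 ∧ nb.1 < pvHg g ∧ 0 ≤ nb.2 ∧ nb.2 < pvWg g) &&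
    decide (pvHtAt g nb - pvHtAt g p ≤ 1))

def pvSteps (g : List (List Char)) : Nat → pvC → pvC → Prop
  | 0, p, q => p = q
  | k + 1, p, q => ∃ m, pvAdj g p m ∧ pvSteps g k m q

def pvDistEq (g : List (List Char)) (p q : pvC) (k : Nat) : Prop :=
  pvSteps g k p q ∧ ∀ j < k, ¬ pvSteps g j p q

def pvDistInt (g : List (List Char)) (p q : pvC) (d : Int) : Prop :=
  (∃ k : Nat, d = (k : Int) ∧ pvDistEq g p q k) ∨
  (d = 100000000 ∧ ∀ k : Nat, ¬ pvSteps g k p q)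

-- paths out of c that only move out of a node that A's BFS expands (a node other
-- than e, or the start itself)
def pvReachE (g : List (List Char)) (e : Option pvC) (c : pvC) : Nat → pvC → Prop
  | 0, x => x = c
  | k + 1, x => ∃ m, pvReachE g e c k m ∧ (m = c ∨ some m ≠ e) ∧ pvAdj g m x

-- ---------- basic grid lemmas ----------

lemma pv_mem_cells (g : List (List Char)) (p : pvC) : p ∈ pvCells g ↔ pvInB g p := by
  rcases p with ⟨a, b⟩
  simp [pvCells, List.pair_mem_product, PySem.List.mem_pyRange_one, pvInB]
  tauto

lemma pv_cells_nodup (g : List (List Char)) : (pvCells g).Nodup := by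
  exact (PySem.List.nodup_pyRange_one _ _).product (PySem.List.nodup_pyRange_one _ _)

lemma pv_cells_length (g : List (List Char)) :
    (pvCells g).length = g.length * (g.headD []).length := by
  simp only [pvCells, pvHg, pvWg]
  simp [List.product, List.length_flatMap, PySem.List.length_pyRange_one]

lemma pv_nbrs_symm (p q : pvC) : q ∈ pvNbrs p ↔ p ∈ pvNbrs q := by
  rcases p with ⟨a, b⟩; rcases q with ⟨x, y⟩
  simp only [pvNbrs, List.mem_cons, Prod.mk.injEq, List.not_mem_nil,
    or_false]
  constructor <;> rintro (⟨h1, h2⟩ | ⟨h1, h2⟩ | ⟨h1, h2⟩ | ⟨h1, h2⟩) <;> omega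

lemma pv_nbrs_nodup (p : pvC) : (pvNbrs p).Nodup := by
  rcases p with ⟨a, b⟩
  simp [pvNbrs, Prod.ext_iff]
  omega

lemma pv_mem_adjList (g : List (List Char)) (p q : pvC) :
    q ∈ pvAdjList g p ↔ pvInB g q ∧ q ∈ pvNbrs p ∧ pvHtAt g q - pvHtAt g p ≤ 1 := by
  simp [pvAdjList, List.mem_filter, pvInB]
  tauto

lemma pv_adjList_adj (g : List (List Char)) (p q : pvC) (hp : pvInB g p) :
    q ∈ pvAdjList g p ↔ pvAdj g p q := by
  rw [pv_mem_adjList, pvAdj]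
  tauto

lemma pv_adjList_nodup (g : List (List Char)) (p : pvC) : (pvAdjList g p).Nodup := by
  exact (pv_nbrs_nodup p).filter _

-- ---------- path lemmas ----------

lemma pvSteps_snoc (g : List (List Char)) (k : Nat) (p q : pvC) :
    pvSteps g (k + 1) p q ↔ ∃ m, pvSteps g k p m ∧ pvAdj g m q := by
  induction k generalizing p with
  | zero =>
    constructor
    · rintro ⟨m, hadj, hm⟩
      exact ⟨p, rfl, by rwa [show m = q from hm] at hadj⟩
    · rintro ⟨m, hm, hadj⟩
      have hmp : m = p := hm.symm
      subst hmp
      exact ⟨q, hadj, rfl⟩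
  | succ k ih =>
    constructor
    · rintro ⟨m, hadj, hsteps⟩
      obtain ⟨m', hm', hadj'⟩ := (ih m).mp hsteps
      exact ⟨m', ⟨m, hadj, hm'⟩, hadj'⟩
    · rintro ⟨m', ⟨m, hadj, hm⟩, hadj'⟩
      exact ⟨m, hadj, (ih m).mpr ⟨m', hm, hadj'⟩⟩

lemma pvReachE_toSteps (g : List (List Char)) (e : Option pvC) (c : pvC) (k : Nat) (x : pvC) :
    pvReachE g e c k x → pvSteps g k c x := by
  induction k generalizing x with
  | zero => intro h; exact (show x = c from h).symm
  | succ k ih =>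
    rintro ⟨m, hr, _, hadj⟩
    exact (pvSteps_snoc g k c x).mpr ⟨m, ih m hr, hadj⟩

lemma pv_steps_reach_aux (g : List (List Char)) (e : Option pvC) (c t : pvC)
    (he : ∀ x : pvC, e = some x → x = t) :
    ∀ (k : Nat) (x : pvC), pvSteps g k c x →
      (∃ k' ≤ k, pvReachE g e c k' x) ∨ (∃ j < k, pvSteps g j c t) := by
  intro k
  induction k with
  | zero =>
    intro x hst
    exact Or.inl ⟨0, le_refl 0, (show c = x from hst).symm⟩
  | succ k ih =>
    intro x hst
    obtain ⟨m, hm, hadj⟩ := (pvSteps_snoc g k c x).mp hst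
    rcases ih m hm with ⟨j, hj, hr⟩ | ⟨j, hj, hstj⟩
    · by_cases hexp : m = c ∨ some m ≠ e
      · exact Or.inl ⟨j + 1, Nat.succ_le_succ hj, ⟨m, hr, hexp, hadj⟩⟩
      · push Not at hexp
        have hmt : m = t := he m hexp.2.symm
        exact Or.inr ⟨k, Nat.lt_succ_self k, hmt ▸ hm⟩
    · exact Or.inr ⟨j, Nat.lt_succ_of_lt hj, hstj⟩

lemma pvSteps_toReachE (g : List (List Char)) (e : Option pvC) (c t : pvC)
    (he : ∀ x : pvC, e = some x → x = t) :
    ∀ k, pvSteps g k c t → ∃ k' ≤ k, pvReachE g e c k' t := by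
  intro k
  induction k using Nat.strong_induction_on with
  | _ k ih =>
    intro hst
    rcases pv_steps_reach_aux g e c t he k t hst with ⟨k', hk', hr⟩ | ⟨j, hj, hstj⟩
    · exact ⟨k', hk', hr⟩
    · obtain ⟨k', hk', hr⟩ := ih j hj hstj
      exact ⟨k', le_of_lt (lt_of_le_of_lt hk' hj), hr⟩

lemma pvAReach_distEq_iff (g : List (List Char)) (e : Option pvC) (c t : pvC)
    (he : ∀ x : pvC, e = some x → x = t) (k : Nat) :
    (pvReachE g e c k t ∧ ∀ j < k, ¬ pvReachE g e c j t) ↔ pvDistEq g c t k := by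
  constructor
  · rintro ⟨hr, hmin⟩
    refine ⟨pvReachE_toSteps g e c k t hr, fun j hj hst => ?_⟩
    obtain ⟨j', hj', hr'⟩ := pvSteps_toReachE g e c t he j hst
    exact hmin j' (lt_of_le_of_lt hj' hj) hr'
  · rintro ⟨hst, hmin⟩
    obtain ⟨k', hk', hr⟩ := pvSteps_toReachE g e c t he k hst
    have hkk : k' = k := by
      rcases lt_or_eq_of_le hk' with h | h
      · exact absurd (pvReachE_toSteps g e c k' t hr) (hmin k' h)
      · exact h
    refine ⟨hkk ▸ hr, fun j hj hr' => ?_⟩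
    exact hmin j hj (pvReachE_toSteps g e c j t hr')

lemma pv_exists_distEq (g : List (List Char)) (p q : pvC) (k : Nat) :
    pvSteps g k p q → ∃ k' ≤ k, pvDistEq g p q k' := by
  induction k using Nat.strong_induction_on with
  | _ k ih =>
    intro hst
    by_cases h : ∃ j, j < k ∧ pvSteps g j p q
    · obtain ⟨j, hj, hstj⟩ := h
      obtain ⟨k', hk', hd⟩ := ih j hj hstj
      exact ⟨k', le_of_lt (lt_of_le_of_lt hk' hj), hd⟩
    · exact ⟨k, le_refl k, hst, fun j hj hstj => h ⟨j, hj, hstj⟩⟩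

lemma pv_distEq_pred (g : List (List Char)) (q : pvC) (d : Nat) (x : pvC) :
    pvDistEq g x q (d + 1) → ∃ y, pvDistEq g y q d := by
  rintro ⟨hst, hmin⟩
  obtain ⟨m, hadj, hm⟩ := hst
  refine ⟨m, hm, fun j hj hstj => ?_⟩
  exact hmin (j + 1) (Nat.succ_lt_succ hj) ⟨m, hadj, hstj⟩

lemma pv_distEq_down (g : List (List Char)) (q : pvC) :
    ∀ d j : Nat, j ≤ d → (∃ x, pvDistEq g x q d) → ∃ y, pvDistEq g y q j := by
  intro d
  induction d with
  | zero => intro j hj h; rw [Nat.le_zero.mp hj]; exact h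
  | succ d ih =>
    intro j hj h
    rcases Nat.lt_or_ge j (d + 1) with hlt | hge
    · obtain ⟨x, hx⟩ := h
      exact ih j (Nat.lt_succ_iff.mp hlt) (pv_distEq_pred g q d x hx)
    · have : j = d + 1 := le_antisymm hj hge
      exact this ▸ h

lemma pvDistInt_unique (g : List (List Char)) (p q : pvC) (d d' : Int) :
    pvDistInt g p q d → pvDistInt g p q d' → d = d' := by
  rintro (⟨k, rfl, hk, hmink⟩ | ⟨rfl, hun⟩) (⟨k', rfl, hk', hmink'⟩ | ⟨rfl, hun'⟩)
  · have : k = k' := by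
      rcases Nat.lt_trichotomy k k' with h | h | h
      · exact absurd hk (hmink' k h)
      · exact h
      · exact absurd hk' (hmink k' h)
    exact congrArg _ this
  · exact absurd hk (hun' k)
  · exact absurd hk' (hun k')
  · rfl

-- ---------- generic fold lemmas ----------

lemma pv_foldl_nested {α β γ : Type} (l : List α) (m : α → List β)
    (f : γ → α × β → γ) (init : γ) :
    l.foldl (fun a x => (m x).foldl (fun a y => f a (x, y)) a) init
      = (l.flatMap (fun x => (m x).map (fun y => (x, y)))).foldl f init := by
  induction l generalizing init with
  | nil => rfl
  | cons x xs ih =>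
    simp only [List.foldl_cons, List.flatMap_cons, List.foldl_append, List.foldl_map]
    exact ih _

lemma pv_get?_insertAll {κ ν : Type} [BEq κ] [LawfulBEq κ] (ks : List κ) (v : ν) :
    ∀ (d : PySem.Dict κ ν) (y : κ),
      (ks.foldl (fun d k => d.insert k v) d).get? y
        = if y ∈ ks then some v else d.get? y := by
  induction ks with
  | nil => simp
  | cons k ks ih =>
    intro d y
    simp only [List.foldl_cons, ih, List.mem_cons]
    by_cases hks : y ∈ ks
    · simp [hks]
    · by_cases hyk : y = k
      · subst hyk
        simp [hks, PySem.Dict.get?_insert_self]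
      · rw [PySem.Dict.get?_insert_of_ne (hne := hyk)]
        simp [hks, hyk]

lemma pv_contains_insertAll {κ ν : Type} [BEq κ] [LawfulBEq κ] (ks : List κ) (v : ν)
    (d : PySem.Dict κ ν) (y : κ) :
    (ks.foldl (fun d k => d.insert k v) d).contains y
      = (decide (y ∈ ks) || d.contains y) := by
  rw [PySem.Dict.contains_eq_isSome_get?, PySem.Dict.contains_eq_isSome_get?,
    pv_get?_insertAll]
  by_cases h : y ∈ ks <;> simp [h]

lemma pv_countDrop (cells Δ : List pvC) (P : pvC → Bool)
    (hc : cells.Nodup) (hΔ : Δ.Nodup)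
    (hsub : ∀ x ∈ Δ, x ∈ cells ∧ P x = true) :
    ((cells.filter (fun c => P c && !Δ.contains c)).length + Δ.length
      = (cells.filter P).length) := by
  induction Δ generalizing cells with
  | nil => simp
  | cons x Δ ih =>
    have hx : x ∈ cells := (hsub x (List.mem_cons_self)).1
    have hPx : P x = true := (hsub x (List.mem_cons_self)).2
    have hperm : cells.Perm (x :: cells.erase x) := List.perm_cons_erase hx
    have hnd' : (cells.erase x).Nodup := hc.erase x
    have hxe : x ∉ cells.erase x := (List.nodup_cons.mp (hperm.nodup_iff.mp hc)).1
    have hΔnd : Δ.Nodup := (List.nodup_cons.mp hΔ).2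
    have hxΔ : x ∉ Δ := (List.nodup_cons.mp hΔ).1
    have hsub' : ∀ y ∈ Δ, y ∈ cells.erase x ∧ P y = true := by
      intro y hy
      refine ⟨?_, (hsub y (List.mem_cons_of_mem _ hy)).2⟩
      have hyx : y ≠ x := fun h => hxΔ (h ▸ hy)
      exact (List.mem_erase_of_ne hyx).mpr (hsub y (List.mem_cons_of_mem _ hy)).1
    have h1 : (cells.filter (fun c => P c && !(x :: Δ).contains c)).length
        = ((cells.erase x).filter (fun c => P c && !Δ.contains c)).length := by
      rw [hperm.filter _ |>.length_eq]
      simp only [List.filter_cons]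
      have hx0 : (P x && !(x :: Δ).contains x) = false := by simp
      rw [hx0]
      simp only [Bool.false_eq_true, if_false]
      congr 1
      apply List.filter_congr
      intro y hy
      have hyx : y ≠ x := fun h => hxe (h ▸ hy)
      simp [hyx]
    have h2 : (cells.filter P).length = ((x :: cells.erase x).filter P).length :=
      (hperm.filter P).length_eq
    rw [h1, h2]
    simp only [List.filter_cons, hPx, if_pos]
    have := ih (cells.erase x) hnd' hΔnd hsub'
    simp only [List.length_cons]
    omega

lemma pv_min_foldl_min (l : List Int) (a x : Int) :
    l.foldl min (min a x) = min a (l.foldl min x) := by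
  induction l generalizing x with
  | nil => rfl
  | cons y ys ih =>
    simp only [List.foldl_cons]
    rw [show min (min a x) y = min a (min x y) from min_assoc a x y, ih]

lemma pv_minq (l : List Int) (a : Int) :
    (PySem.List.min? (l ++ [a]) (fun y => y)).getD 0 = l.foldl min a := by
  cases l with
  | nil => simp [PySem.List.min?_id_cons]
  | cons x xs =>
    rw [List.cons_append, PySem.List.min?_id_cons]
    simp only [Option.getD_some, List.foldl_append, List.foldl_cons, List.foldl_nil]
    rw [pv_min_foldl_min xs a x]
    exact min_comm _ _

lemma pv_foldl_min_of_le (l : List Int) (a : Int) (h : ∀ y ∈ l, a ≤ y) :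
    l.foldl min a = a := by
  induction l with
  | nil => rfl
  | cons y ys ih =>
    simp only [List.foldl_cons]
    rw [min_eq_left (h y List.mem_cons_self)]
    exact ih (fun z hz => h z (List.mem_cons_of_mem _ hz))

-- ---------- A-side BFS ----------

lemma pv_bfs_inner (e : Option pvC) (cs : Int) (ns : List pvC) (hnd : ns.Nodup) :
    ∀ (rest : List (Option pvC × Int)) (seen : PySem.Dict (Option pvC) Int),
      (∀ n ∈ ns, ∀ v : Int, seen.get? (some n) = some v → ¬ cs < v) →
      ns.foldl (fun st n =>
          if (match st.2.get? (some n) with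
              | none => true
              | some v => decide (cs < v)) = true then
            let seen' := st.2.insert (some n) cs
            if some n ≠ e then (st.1 ++ [(some n, cs)], seen') else (st.1, seen')
          else st) (rest, seen)
        = (rest ++ ((ns.filter (fun n => !(seen.contains (some n)) && decide (some n ≠ e))).map
              (fun n => (some n, cs))),
           (ns.filter (fun n => !(seen.contains (some n)))).foldl
              (fun d n => d.insert (some n) cs) seen) := by
  induction ns with
  | nil =>
    intro rest seen _
    simp only [List.foldl_nil, List.filter_nil, List.map_nil, List.append_nil]
  | cons n ns ih =>
    have hnm : n ∉ ns := (List.nodup_cons.mp hnd).1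
    have hnd' : ns.Nodup := (List.nodup_cons.mp hnd).2
    intro rest seen hskip
    simp only [List.foldl_cons, List.filter_cons]
    by_cases hcon : seen.contains (some n) = true
    · obtain ⟨v, hv⟩ : ∃ v, seen.get? (some n) = some v := by
        rw [PySem.Dict.contains_eq_isSome_get?] at hcon
        exact Option.isSome_iff_exists.mp hcon
      have hnotlt : ¬ cs < v := hskip n List.mem_cons_self v hv
      rw [if_neg (by simp [hv, hnotlt])]
      rw [ih hnd' rest seen (fun m hm => hskip m (List.mem_cons_of_mem _ hm))]
      simp [hcon]
    · have hget : seen.get? (some n) = none := by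
        rw [PySem.Dict.contains_eq_isSome_get?] at hcon
        simpa using hcon
      rw [if_pos (by simp [hget])]
      have hskip' : ∀ m ∈ ns, ∀ v : Int,
          (seen.insert (some n) cs).get? (some m) = some v → ¬ cs < v := by
        intro m hm v hv
        have hmn : (some m : Option pvC) ≠ some n := by
          simp only [ne_eq, Option.some.injEq]
          exact fun h => hnm (h ▸ hm)
        rw [PySem.Dict.get?_insert_of_ne (hne := hmn)] at hv
        exact hskip m (List.mem_cons_of_mem _ hm) v hv
      have hfil : ns.filter (fun m => !((seen.insert (some n) cs).contains (some m)))
          = ns.filter (fun m => !(seen.contains (some m))) := by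
        apply List.filter_congr
        intro m hm
        have hmn : (some m : Option pvC) ≠ some n := by
          simp only [ne_eq, Option.some.injEq]
          exact fun h => hnm (h ▸ hm)
        rw [PySem.Dict.contains_insert]
        have : ((some m : Option pvC) == some n) = false := by
          simpa using hmn
        rw [this]
        simp
      have hfil2 : ns.filter (fun m => !((seen.insert (some n) cs).contains (some m)) &&
            decide (some m ≠ e))
          = ns.filter (fun m => !(seen.contains (some m)) && decide (some m ≠ e)) := by
        apply List.filter_congr
        intro m hm
        have hmn : (some m : Option pvC) ≠ some n := by
          simp only [ne_eq, Option.some.injEq]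
          exact fun h => hnm (h ▸ hm)
        rw [PySem.Dict.contains_insert]
        have : ((some m : Option pvC) == some n) = false := by
          simpa using hmn
        rw [this]
        simp
      by_cases hne : (some n : Option pvC) ≠ e
      · rw [if_pos hne]
        rw [ih hnd' (rest ++ [(some n, cs)]) (seen.insert (some n) cs) hskip']
        rw [hfil, hfil2]
        simp [hcon, hne, List.append_assoc]
      · rw [if_neg hne]
        rw [ih hnd' rest (seen.insert (some n) cs) hskip']
        rw [hfil, hfil2]
        have : decide ((some n : Option pvC) ≠ e) = false := by
          simpa using hne
        simp [hcon, this]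

structure pvInvA (g : List (List Char)) (e : Option pvC) (c : pvC) (k : Nat)
    (F1 F2 : List pvC) (seen : PySem.Dict (Option pvC) Int) : Prop where
  hF1 : ∀ x ∈ F1, seen.get? (some x) = some (k : Int)
  hF2 : ∀ x ∈ F2, seen.get? (some x) = some ((k + 1 : Nat) : Int)
  hnd : (F1 ++ F2).Nodup
  hcells : ∀ x ∈ F1 ++ F2, x ∈ pvCells g
  hexp : ∀ x ∈ F1 ++ F2, x = c ∨ some x ≠ e
  hkeys : seen.keys.Nodup
  hsome : ∀ y, seen.contains y = true → ∃ x, y = some x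
  hkeycell : ∀ x, seen.contains (some x) = true → x ∈ pvCells g
  hval : ∀ (x : pvC) (d : Int), seen.get? (some x) = some d →
    ∃ j : Nat, d = (j : Int) ∧ pvReachE g e c j x ∧ ∀ i < j, ¬ pvReachE g e c i x
  hcompl : ∀ x j, pvReachE g e c j x → j ≤ k → seen.contains (some x) = true
  hproc : ∀ x, seen.contains (some x) = true → x ∉ F1 ++ F2 → (x = c ∨ some x ≠ e) →
    ∀ y ∈ pvAdjList g x, seen.contains (some y) = true

def pvOutA (g : List (List Char)) (e : Option pvC) (c : pvC)
    (res : PySem.Dict (Option pvC) Int) : Prop :=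
  (∀ (x : pvC) (d : Int), res.get? (some x) = some d →
      ∃ j : Nat, d = (j : Int) ∧ pvReachE g e c j x ∧ ∀ i < j, ¬ pvReachE g e c i x)
  ∧ (∀ (x : pvC) (j : Nat), pvReachE g e c j x → res.contains (some x) = true)
  ∧ (∀ y, res.contains y = true → ∃ x, y = some x)

lemma pv_invA_shift (g : List (List Char)) (e : Option pvC) (c : pvC) (k : Nat)
    (F2 : List pvC) (seen : PySem.Dict (Option pvC) Int)
    (h : pvInvA g e c k [] F2 seen) : pvInvA g e c (k + 1) F2 [] seen := by
  refine ⟨fun x hx => h.hF2 x hx, fun x hx => absurd hx (List.not_mem_nil),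
    by simpa using h.hnd, fun x hx => h.hcells x (by simpa using hx),
    fun x hx => h.hexp x (by simpa using hx), h.hkeys, h.hsome, h.hkeycell, h.hval,
    ?_, fun x hc hq => h.hproc x hc (by simpa using hq)⟩
  intro x j hr hj
  rcases Nat.lt_or_ge j (k + 1) with hlt | hge
  · exact h.hcompl x j hr (Nat.lt_succ_iff.mp hlt)
  · have hjeq : j = k + 1 := le_antisymm hj hge
    subst hjeq
    obtain ⟨m, hrm, hexpm, hadj⟩ := hr
    have hcm : seen.contains (some m) = true := h.hcompl m k hrm (le_refl k)
    have hmF2 : m ∉ F2 := by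
      intro hmem
      have hget := h.hF2 m hmem
      obtain ⟨j', hj', hreach', hmin'⟩ := h.hval m _ hget
      have : j' = k + 1 := by exact_mod_cast hj'.symm
      subst this
      exact hmin' k (Nat.lt_succ_self k) hrm
    have := h.hproc m hcm (by simpa using hmF2) hexpm x
      ((pv_adjList_adj g m x hadj.1).mpr hadj)
    exact this

lemma pv_bfsA_run (g : List (List Char)) (graph : PySem.Dict (Option pvC) (List pvC))
    (e : Option pvC) (c : pvC)
    (hgraph : ∀ p : pvC, graph.getD (some p) [] = if p ∈ pvCells g then pvAdjList g p else [])
    (hc : c ∈ pvCells g) :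
    ∀ (n fuel k : Nat) (F1 F2 : List pvC) (seen : PySem.Dict (Option pvC) Int),
      2 * fuel + (if F1 = [] then 1 else 0) ≤ n →
      pvInvA g e c k F1 F2 seen →
      F1.length + F2.length +
        ((pvCells g).filter (fun x => !(seen.contains (some x)))).length + 1 ≤ fuel →
      pvOutA g e c (pvBfsLoop graph e fuel
        (F1.map (fun x => (some x, (k : Int))) ++
         F2.map (fun x => (some x, ((k + 1 : Nat) : Int)))) seen) := by
  intro n
  induction n using Nat.strong_induction_on with
  | _ n ih =>
    intro fuel k F1 F2 seen hn hinv hfuel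
    cases fuel with
    | zero => omega
    | succ fuel =>
    cases F1 with
    | nil =>
      cases F2 with
      | nil =>
        simp only [List.map_nil, List.append_nil]
        rw [pvBfsLoop]
        refine ⟨hinv.hval, ?_, hinv.hsome⟩
        intro x j hr
        induction j using Nat.strong_induction_on generalizing x with
        | _ j ihj =>
          cases j with
          | zero => exact hinv.hcompl x 0 hr (Nat.zero_le k)
          | succ j =>
            obtain ⟨m, hrm, hexpm, hadj⟩ := hr
            have hcm := ihj j (Nat.lt_succ_self j) m hrm
            exact hinv.hproc m hcm (by simp) hexpm x ((pv_adjList_adj g m x hadj.1).mpr hadj)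
      | cons f2 F2' =>
        have hshift := pv_invA_shift g e c k (f2 :: F2') seen hinv
        have := ih (n - 1) (by omega) (fuel + 1) (k + 1) (f2 :: F2') [] seen
          (by
            have hn' : 2 * (fuel + 1) + 1 ≤ n := by simpa using hn
            have h0 : (if (f2 :: F2') = [] then 1 else 0) = 0 := by simp
            rw [h0]
            omega)
          hshift (by simp only [List.length_nil] at hfuel ⊢; omega)
        simpa using this
    | cons p F1' =>
      have hpmem : p ∈ (p :: F1') ++ F2 := List.mem_append_left _ List.mem_cons_self
      have hpcell : p ∈ pvCells g := hinv.hcells p hpmem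
      have hpinB : pvInB g p := (pv_mem_cells g p).mp hpcell
      have hpget : seen.get? (some p) = some (k : Int) := hinv.hF1 p List.mem_cons_self
      have hpreach : pvReachE g e c k p := by
        obtain ⟨jp, hjp, hrp, _⟩ := hinv.hval p _ hpget
        have : jp = k := by exact_mod_cast hjp.symm
        exact this ▸ hrp
      have hpexp : p = c ∨ some p ≠ e := hinv.hexp p hpmem
      have hcreach : pvReachE g e c 0 c := rfl
      have hccon : seen.contains (some c) = true := hinv.hcompl c 0 hcreach (Nat.zero_le k)
      simp only [List.map_cons, List.cons_append]
      rw [pvBfsLoop]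
      rw [hgraph p, if_pos hpcell]
      have hskip : ∀ nn ∈ pvAdjList g p, ∀ v : Int,
          seen.get? (some nn) = some v → ¬ ((k : Int) + 1) < v := by
        intro nn hnn v hv
        obtain ⟨j, hj, hrj, hminj⟩ := hinv.hval nn v hv
        have hreach1 : pvReachE g e c (k + 1) nn :=
          ⟨p, hpreach, hpexp, (pv_adjList_adj g p nn hpinB).mp hnn⟩
        have hjle : j ≤ k + 1 := by
          by_contra hgt
          push Not at hgt
          exact hminj (k + 1) hgt hreach1
        subst hj
        intro hlt
        have hlt' : (k + 1 : Nat) < j := by exact_mod_cast hlt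
        omega
      rw [pv_bfs_inner e ((k : Int) + 1) (pvAdjList g p) (pv_adjList_nodup g p)
        (F1'.map (fun x => (some x, (k : Int))) ++
         F2.map (fun x => (some x, ((k + 1 : Nat) : Int)))) seen hskip]
      set fresh := (pvAdjList g p).filter (fun nn => !(seen.contains (some nn))) with hfresh
      set freshPush := (pvAdjList g p).filter
        (fun nn => !(seen.contains (some nn)) && decide (some nn ≠ e)) with hfreshPush
      set seen' := fresh.foldl (fun d nn => d.insert (some nn) ((k : Int) + 1)) seen with hseen'
      have hfoldmap : seen' = (fresh.map some).foldl
          (fun d y => d.insert y ((k : Int) + 1)) seen := by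
        rw [List.foldl_map]
      have hget' : ∀ y, seen'.get? y
          = if y ∈ fresh.map some then some ((k : Int) + 1) else seen.get? y := by
        intro y
        rw [hfoldmap, pv_get?_insertAll]
      have hcon' : ∀ y, seen'.contains y
          = (decide (y ∈ fresh.map some) || seen.contains y) := by
        intro y
        rw [hfoldmap, pv_contains_insertAll]
      have hfreshmem : ∀ nn : pvC, nn ∈ fresh ↔
          nn ∈ pvAdjList g p ∧ seen.contains (some nn) = false := by
        intro nn
        rw [hfresh, List.mem_filter]
        simp
      have hfreshsome : ∀ nn : pvC, ((some nn) ∈ fresh.map some) ↔ nn ∈ fresh := by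
        intro nn
        simp
      have hpushmem : ∀ nn : pvC, nn ∈ freshPush ↔
          nn ∈ pvAdjList g p ∧ seen.contains (some nn) = false ∧ (some nn : Option pvC) ≠ e := by
        intro nn
        rw [hfreshPush, List.mem_filter]
        simp
      have hpushsub : ∀ nn : pvC, nn ∈ freshPush → nn ∈ fresh := by
        intro nn hnn
        rw [hpushmem] at hnn
        rw [hfreshmem]
        exact ⟨hnn.1, hnn.2.1⟩
      have hfreshnd : fresh.Nodup := (pv_adjList_nodup g p).filter _
      have hpushnd : freshPush.Nodup := (pv_adjList_nodup g p).filter _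
      have hfreshreach : ∀ nn ∈ fresh, pvReachE g e c (k + 1) nn ∧
          (∀ i < k + 1, ¬ pvReachE g e c i nn) := by
        intro nn hnn
        rw [hfreshmem] at hnn
        refine ⟨⟨p, hpreach, hpexp, (pv_adjList_adj g p nn hpinB).mp hnn.1⟩, ?_⟩
        intro i hi hri
        have := hinv.hcompl nn i hri (Nat.lt_succ_iff.mp hi)
        rw [hnn.2] at this
        exact absurd this (by simp)
      have hqueue :
          (F1'.map (fun x => (some x, (k : Int))) ++
            F2.map (fun x => (some x, ((k + 1 : Nat) : Int)))) ++
            freshPush.map (fun nn => ((some nn : Option pvC), (k : Int) + 1))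
          = F1'.map (fun x => (some x, (k : Int))) ++
            (F2 ++ freshPush).map (fun x => (some x, ((k + 1 : Nat) : Int))) := by
        have hcast2 : freshPush.map (fun nn => ((some nn : Option pvC), (k : Int) + 1))
            = freshPush.map (fun x => ((some x : Option pvC), ((k + 1 : Nat) : Int))) := by
          apply List.map_congr_left
          intro x _
          have : ((k : Int) + 1) = ((k + 1 : Nat) : Int) := by push_cast; ring
          rw [this]
        rw [hcast2, List.map_append, List.append_assoc]
      rw [hqueue]
      have holdnd : (F1' ++ F2).Nodup := by
        have := hinv.hnd
        rw [List.cons_append, List.nodup_cons] at this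
        exact this.2
      have holdnotp : p ∉ F1' ++ F2 := by
        have := hinv.hnd
        rw [List.cons_append, List.nodup_cons] at this
        exact this.1
      have holdcon : ∀ x ∈ F1' ++ F2, seen.contains (some x) = true := by
        intro x hx
        rcases List.mem_append.mp hx with h1 | h2
        · rw [PySem.Dict.contains_eq_isSome_get?, hinv.hF1 x (List.mem_cons_of_mem _ h1)]
          rfl
        · rw [PySem.Dict.contains_eq_isSome_get?, hinv.hF2 x h2]
          rfl
      have hinv' : pvInvA g e c k F1' (F2 ++ freshPush) seen' := by
        refine ⟨?_, ?_, ?_, ?_, ?_, ?_, ?_, ?_, ?_, ?_, ?_⟩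
        · intro x hx
          rw [hget', if_neg]
          · exact hinv.hF1 x (List.mem_cons_of_mem _ hx)
          · rw [hfreshsome, hfreshmem]
            rintro ⟨_, hcf⟩
            have := holdcon x (List.mem_append_left _ hx)
            rw [hcf] at this
            exact absurd this (by simp)
        · intro x hx
          rcases List.mem_append.mp hx with h1 | h2
          · rw [hget', if_neg]
            · exact hinv.hF2 x h1
            · rw [hfreshsome, hfreshmem]
              rintro ⟨_, hcf⟩
              have := holdcon x (List.mem_append_right _ h1)
              rw [hcf] at this
              exact absurd this (by simp)
          · rw [hget', if_pos]
            · exact congrArg some (by push_cast; ring)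
            · rw [hfreshsome]
              exact hpushsub x h2
        · rw [← List.append_assoc]
          apply List.Nodup.append
          · exact holdnd
          · exact hpushnd
          · intro x hx1 hx2
            have h1 := holdcon x hx1
            have h2 := (hpushmem x).mp hx2
            rw [h2.2.1] at h1
            exact absurd h1 (by simp)
        · intro x hx
          rcases List.mem_append.mp hx with h1 | h2
          · exact hinv.hcells x (List.mem_append_left _ (List.mem_cons_of_mem _ h1))
          · rcases List.mem_append.mp h2 with ha | hb
            · exact hinv.hcells x (List.mem_append_right _ ha)
            · have := (hpushmem x).mp hb
              have hmem := (pv_mem_adjList g p x).mp this.1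
              exact (pv_mem_cells g x).mpr hmem.1
        · intro x hx
          rcases List.mem_append.mp hx with h1 | h2
          · exact hinv.hexp x (List.mem_append_left _ (List.mem_cons_of_mem _ h1))
          · rcases List.mem_append.mp h2 with ha | hb
            · exact hinv.hexp x (List.mem_append_right _ ha)
            · exact Or.inr ((hpushmem x).mp hb).2.2
        · rw [hfoldmap]
          exact PySem.Dict.nodup_keys_foldl_insert _ (fun _ _ => ((k : Int) + 1)) seen
            hinv.hkeys
        · intro y hy
          rw [hcon'] at hy
          rcases Bool.or_eq_true_iff.mp hy with h | h
          · obtain ⟨nn, _, hnn⟩ := List.mem_map.mp (of_decide_eq_true h)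
            exact ⟨nn, hnn.symm⟩
          · exact hinv.hsome y h
        · intro x hx
          rw [hcon'] at hx
          rcases Bool.or_eq_true_iff.mp hx with h | h
          · have : x ∈ fresh := (hfreshsome x).mp (of_decide_eq_true h)
            rw [hfreshmem] at this
            exact (pv_mem_cells g x).mpr ((pv_mem_adjList g p x).mp this.1).1
          · exact hinv.hkeycell x h
        · intro x d hd
          rw [hget'] at hd
          by_cases hxf : (some x : Option pvC) ∈ fresh.map some
          · rw [if_pos hxf] at hd
            have hxfresh : x ∈ fresh := (hfreshsome x).mp hxf
            obtain ⟨hr1, hr2⟩ := hfreshreach x hxfresh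
            refine ⟨k + 1, ?_, hr1, hr2⟩
            rw [← Option.some_inj.mp hd]
            push_cast
            ring
          · rw [if_neg hxf] at hd
            exact hinv.hval x d hd
        · intro x j hr hj
          rw [hcon']
          rw [hinv.hcompl x j hr hj]
          simp
        · intro x hx hnq hexpx
          rw [hcon'] at hx
          intro y hy
          rw [hcon']
          by_cases hyf : y ∈ fresh
          · rw [decide_eq_true ((List.mem_map.mpr ⟨y, hyf, rfl⟩))]
            simp
          · rcases Bool.or_eq_true_iff.mp hx with hxf | hxold
            · -- x was freshly inserted but is not in the new queue: impossible
              exfalso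
              have hxfresh : x ∈ fresh := (hfreshsome x).mp (of_decide_eq_true hxf)
              have hxnotpush : x ∉ freshPush := by
                intro hmem
                exact hnq (List.mem_append_right _ (List.mem_append_right _ hmem))
              have hxe : (some x : Option pvC) = e := by
                by_contra hne
                apply hxnotpush
                rw [hpushmem]
                have := (hfreshmem x).mp hxfresh
                exact ⟨this.1, this.2, hne⟩
              have hxc : x = c := by
                rcases hexpx with h | h
                · exact h
                · exact absurd hxe h
              have := (hfreshmem x).mp hxfresh
              rw [hxc] at this
              rw [this.2] at hccon
              exact absurd hccon (by simp)
            · by_cases hxp : x = p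
              · subst hxp
                -- x = p: p's neighbours are now all discovered
                by_cases hycon : seen.contains (some y) = true
                · rw [hycon]
                  simp
                · exfalso
                  apply hyf
                  rw [hfreshmem]
                  refine ⟨hy, ?_⟩
                  cases hcy : seen.contains (some y)
                  · rfl
                  · exact absurd hcy hycon
              · have hxnold : x ∉ (p :: F1') ++ F2 := by
                  intro hmem
                  rcases List.mem_append.mp hmem with h1 | h2
                  · rcases List.mem_cons.mp h1 with h3 | h4
                    · exact hxp h3
                    · exact hnq (List.mem_append_left _ h4)
                  · exact hnq (List.mem_append_right _ (List.mem_append_left _ h2))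
                have := hinv.hproc x hxold hxnold hexpx y hy
                rw [this]
                simp
      have hcount := pv_countDrop (pvCells g) fresh
        (fun x => !(seen.contains (some x))) (pv_cells_nodup g) hfreshnd
        (fun x hx => by
          have := (hfreshmem x).mp hx
          exact ⟨(pv_mem_cells g x).mpr ((pv_mem_adjList g p x).mp this.1).1,
            by simp [this.2]⟩)
      have hfilter_eq : (pvCells g).filter (fun x => !(seen'.contains (some x)))
          = (pvCells g).filter
              (fun x => !(seen.contains (some x)) && !(fresh.contains x)) := by
        apply List.filter_congr
        intro x _
        rw [hcon']
        by_cases hx : x ∈ fresh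
        · simp [hx]
        · simp [hx]
      have hpushlen : freshPush.length ≤ fresh.length :=
        (List.subperm_of_subset hpushnd hpushsub).length_le
      have hmeas : F1'.length + (F2 ++ freshPush).length +
          ((pvCells g).filter (fun x => !(seen'.contains (some x)))).length + 1 ≤ fuel := by
        rw [hfilter_eq]
        beta_reduce at hcount
        simp only [List.length_append]
        simp only [List.length_cons] at hfuel
        omega
      exact ih (n - 1) (by omega) fuel k F1' (F2 ++ freshPush) seen'
        (by
          have : (if F1' = [] then 1 else 0) ≤ 1 := by split <;> omega
          split at hn <;> omega)
        hinv' hmeas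

lemma pv_bfsA_eval (g : List (List Char)) (graph : PySem.Dict (Option pvC) (List pvC))
    (e : Option pvC) (c : pvC)
    (hgraph : ∀ p : pvC, graph.getD (some p) [] = if p ∈ pvCells g then pvAdjList g p else [])
    (hc : c ∈ pvCells g) :
    (∀ t, e = some t → pvDistInt g c t (pvBfs (g.length * (g.headD []).length) graph (some c) e))
    ∧ (e = none → pvBfs (g.length * (g.headD []).length) graph (some c) e = 100000000) := by
  have hget0 : ∀ y, (PySem.Dict.empty.insert (some c) (0 : Int)).get? y
      = if y = some c then some (0 : Int) else none := by
    intro y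
    by_cases hy : y = some c
    · subst hy; simp [PySem.Dict.get?_insert_self]
    · rw [PySem.Dict.get?_insert_of_ne (hne := hy)]
      simp [PySem.Dict.get?_empty, hy]
  have hinv0 : pvInvA g e c 0 [c] [] (PySem.Dict.empty.insert (some c) 0) := by
    refine ⟨?_, ?_, ?_, ?_, ?_, ?_, ?_, ?_, ?_, ?_, ?_⟩
    · intro x hx
      have hx' : x = c := List.mem_singleton.mp hx
      subst hx'
      rw [hget0, if_pos rfl]
      rfl
    · intro x hx; exact absurd hx (List.not_mem_nil)
    · simp
    · intro x hx
      have hx' : x = c := by simpa using hx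
      exact hx' ▸ hc
    · intro x hx
      have hx' : x = c := by simpa using hx
      exact Or.inl hx'
    · exact PySem.Dict.nodup_keys_insert _ _ _ (PySem.Dict.nodup_keys_empty)
    · intro y hy
      rw [PySem.Dict.contains_eq_isSome_get?, hget0 y] at hy
      by_cases hyc : y = some c
      · exact ⟨c, hyc⟩
      · rw [if_neg hyc] at hy; simp at hy
    · intro x hx
      rw [PySem.Dict.contains_eq_isSome_get?, hget0 (some x)] at hx
      by_cases hxc : (some x : Option pvC) = some c
      · exact (Option.some_inj.mp hxc) ▸ hc
      · rw [if_neg hxc] at hx; simp at hx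
    · intro x d hd
      rw [hget0 (some x)] at hd
      by_cases hxc : (some x : Option pvC) = some c
      · rw [if_pos hxc] at hd
        have hx : x = c := Option.some_inj.mp hxc
        subst hx
        exact ⟨0, by simpa using hd.symm, rfl, fun i hi => absurd hi (Nat.not_lt_zero i)⟩
      · rw [if_neg hxc] at hd; exact absurd hd (by simp)
    · intro x j hr hj
      have hj0 : j = 0 := Nat.le_zero.mp hj
      subst hj0
      have hx : x = c := hr
      subst hx
      rw [PySem.Dict.contains_eq_isSome_get?, hget0 (some x), if_pos rfl]
      rfl
    · intro x hx hnq hexpx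
      exfalso
      rw [PySem.Dict.contains_eq_isSome_get?, hget0 (some x)] at hx
      by_cases hxc : (some x : Option pvC) = some c
      · exact hnq (by simp [Option.some_inj.mp hxc])
      · rw [if_neg hxc] at hx; simp at hx
  have hrun := pv_bfsA_run g graph e c hgraph hc
    (2 * (g.length * (g.headD []).length + 2) + 1)
    (g.length * (g.headD []).length + 2) 0 [c] []
    (PySem.Dict.empty.insert (some c) 0)
    (by simp)
    hinv0
    (by
      have h1 : ((pvCells g).filter
          (fun x => !((PySem.Dict.empty.insert (some c) (0:Int)).contains (some x)))).length
          ≤ (pvCells g).length := List.length_filter_le _ _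
      have h2 := pv_cells_length g
      simp only [List.length_cons, List.length_nil]
      omega)
  obtain ⟨hP1, hP2, hP3⟩ := hrun
  set res := pvBfsLoop graph e (g.length * (g.headD []).length + 2)
    ([c].map (fun x => ((some x : Option pvC), ((0 : Nat) : Int))) ++
      ([] : List pvC).map (fun x => ((some x : Option pvC), ((0 + 1 : Nat) : Int))))
    (PySem.Dict.empty.insert (some c) 0) with hres
  have hbfs : pvBfs (g.length * (g.headD []).length) graph (some c) e
      = match res.get? e with
        | none => 100000000
        | some v => v := by
    rfl
  constructor
  · intro t het
    have he : ∀ x : pvC, e = some x → x = t := by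
      intro x hx
      rw [het] at hx
      exact (Option.some_inj.mp hx).symm
    rw [hbfs]
    by_cases hreach : ∃ j : Nat, pvReachE g e c j t
    · obtain ⟨j, hj⟩ := hreach
      have hcon := hP2 t j hj
      obtain ⟨v, hv⟩ : ∃ v, res.get? (some t) = some v := by
        rw [PySem.Dict.contains_eq_isSome_get?] at hcon
        exact Option.isSome_iff_exists.mp hcon
      obtain ⟨j', hj', hrj', hmin'⟩ := hP1 t v hv
      rw [het, hv]
      exact Or.inl ⟨j', hj', (pvAReach_distEq_iff g e c t he j').mp ⟨hrj', hmin'⟩⟩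
    · have hnone : res.get? (some t) = none := by
        cases hg : res.get? (some t) with
        | none => rfl
        | some v =>
          obtain ⟨j', _, hrj', _⟩ := hP1 t v hg
          exact absurd ⟨j', hrj'⟩ hreach
      rw [het, hnone]
      refine Or.inr ⟨rfl, fun j hst => ?_⟩
      obtain ⟨j', _, hr'⟩ := pvSteps_toReachE g e c t he j hst
      exact hreach ⟨j', hr'⟩
  · intro hen
    rw [hbfs, hen]
    have : res.get? none = none := by
      cases hg : res.get? none with
      | none => rfl
      | some v =>
        have hcon : res.contains none = true := by
          rw [PySem.Dict.contains_eq_isSome_get?, hg]; rfl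
        obtain ⟨x, hx⟩ := hP3 none hcon
        exact absurd hx (by simp)
    rw [this]

lemma pv_bfs_none (g : List (List Char)) (hw : Nat)
    (graph : PySem.Dict (Option pvC) (List pvC))
    (hgnone : graph.getD none [] = []) (e : Option pvC) :
    pvBfs hw graph none e = if e = none then 0 else 100000000 := by
  show (match (pvBfsLoop graph e (hw + 2) [((none : Option pvC), (0 : Int))]
      (PySem.Dict.empty.insert none 0)).get? e with
    | none => (100000000 : Int)
    | some v => v) = _
  have h1 : pvBfsLoop graph e (hw + 2) [((none : Option pvC), (0 : Int))]
      (PySem.Dict.empty.insert none 0) = PySem.Dict.empty.insert none 0 := by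
    rw [pvBfsLoop]
    rw [hgnone]
    simp only [List.foldl_nil]
    rw [pvBfsLoop]
  rw [h1]
  by_cases he : e = none
  · subst he
    rw [PySem.Dict.get?_insert_self]
    rfl
  · rw [PySem.Dict.get?_insert_of_ne (hne := he)]
    rw [PySem.Dict.get?_empty]
    simp [he]

-- ---------- B-side BFS ----------

lemma pv_grow (g : List (List Char)) (steps' : Int) :
    ∀ (prs : List (pvC × pvC)) (dist : PySem.Dict (Option pvC) Int) (nxt : List pvC),
      ∃ Δ : List pvC,
        prs.foldl (fun st pr =>
            if 0 ≤ pr.2.1 ∧ pr.2.1 < pvHg g ∧ 0 ≤ pr.2.2 ∧ pr.2.2 < pvWg g ∧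
                st.1.contains (some pr.2) = false ∧
                pvHeight (pvAt g pr.1.1 pr.1.2) - pvHeight (pvAt g pr.2.1 pr.2.2) ≤ 1 then
              (st.1.insert (some pr.2) steps', st.2 ++ [pr.2])
            else st) (dist, nxt)
          = (Δ.foldl (fun d x => d.insert (some x) steps') dist, nxt ++ Δ)
        ∧ Δ.Nodup
        ∧ (∀ x : pvC, x ∈ Δ ↔ (dist.contains (some x) = false ∧ ∃ u : pvC, (u, x) ∈ prs ∧
            0 ≤ x.1 ∧ x.1 < pvHg g ∧ 0 ≤ x.2 ∧ x.2 < pvWg g ∧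
            pvHeight (pvAt g u.1 u.2) - pvHeight (pvAt g x.1 x.2) ≤ 1)) := by
  intro prs
  induction prs with
  | nil =>
    intro dist nxt
    exact ⟨[], by simp, List.nodup_nil, by simp⟩
  | cons pr prs ih =>
    intro dist nxt
    simp only [List.foldl_cons]
    by_cases hcond : 0 ≤ pr.2.1 ∧ pr.2.1 < pvHg g ∧ 0 ≤ pr.2.2 ∧ pr.2.2 < pvWg g ∧
        dist.contains (some pr.2) = false ∧
        pvHeight (pvAt g pr.1.1 pr.1.2) - pvHeight (pvAt g pr.2.1 pr.2.2) ≤ 1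
    · rw [if_pos hcond]
      obtain ⟨Δ, heq, hnd, hmem⟩ := ih (dist.insert (some pr.2) steps') (nxt ++ [pr.2])
      refine ⟨pr.2 :: Δ, ?_, ?_, ?_⟩
      · rw [heq]
        simp [List.append_assoc]
      · rw [List.nodup_cons]
        refine ⟨fun hmem2 => ?_, hnd⟩
        have := (hmem pr.2).mp hmem2
        rw [PySem.Dict.contains_insert] at this
        simp at this
      · intro x
        rw [List.mem_cons, hmem x]
        constructor
        · rintro (rfl | ⟨hc, u, hu, hrest⟩)
          · exact ⟨hcond.2.2.2.2.1, pr.1, by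
              rcases pr with ⟨u, x⟩
              exact ⟨List.mem_cons_self, hcond.1, hcond.2.1, hcond.2.2.1,
                hcond.2.2.2.1, hcond.2.2.2.2.2⟩⟩
          · rw [PySem.Dict.contains_insert] at hc
            simp only [Bool.or_eq_false_iff, beq_eq_false_iff_ne, ne_eq] at hc
            exact ⟨hc.2, u, List.mem_cons_of_mem _ hu, hrest⟩
        · rintro ⟨hc, u, hu, hrest⟩
          rcases List.mem_cons.mp hu with hu1 | hu2
          · left
            exact congrArg Prod.snd hu1
          · by_cases hx : x = pr.2
            · exact Or.inl hx
            · right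
              refine ⟨?_, u, hu2, hrest⟩
              rw [PySem.Dict.contains_insert]
              have : ((some x : Option pvC) == some pr.2) = false := by simp [hx]
              rw [this]
              simpa using hc
    · rw [if_neg hcond]
      obtain ⟨Δ, heq, hnd, hmem⟩ := ih dist nxt
      refine ⟨Δ, heq, hnd, ?_⟩
      intro x
      rw [hmem x]
      constructor
      · rintro ⟨hc, u, hu, hrest⟩
        exact ⟨hc, u, List.mem_cons_of_mem _ hu, hrest⟩
      · rintro ⟨hc, u, hu, hrest⟩
        rcases List.mem_cons.mp hu with hu1 | hu2
        · exfalso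
          apply hcond
          have hux : pr = (u, x) := hu1.symm
          rw [hux]
          exact ⟨hrest.1, hrest.2.1, hrest.2.2.1, hrest.2.2.2.1, hc, hrest.2.2.2.2⟩
        · exact ⟨hc, u, hu2, hrest⟩

lemma pv_src_inB (g : List (List Char)) (t : pvC) (ht : pvInB g t) (k : Nat) (u : pvC)
    (h : pvSteps g k u t) : pvInB g u := by
  cases k with
  | zero => exact (show u = t from h) ▸ ht
  | succ k => obtain ⟨m, hadj, _⟩ := h; exact hadj.1

structure pvInvB (g : List (List Char)) (t : pvC) (k : Nat)
    (dist : PySem.Dict (Option pvC) Int) (frontier : List pvC) : Prop where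
  hfr : ∀ x, x ∈ frontier ↔ pvDistEq g x t k
  hfnd : frontier.Nodup
  hkeys : dist.keys.Nodup
  hsome : ∀ y, dist.contains y = true → ∃ x : pvC, y = some x
  hval : ∀ (x : pvC) (d : Int), dist.get? (some x) = some d →
    ∃ j : Nat, d = (j : Int) ∧ j ≤ k ∧ pvDistEq g x t j
  hcompl : ∀ x j, j ≤ k → pvSteps g j x t → dist.contains (some x) = true
  hkeycell : ∀ x : pvC, dist.contains (some x) = true → x ∈ pvCells g

def pvOutB (g : List (List Char)) (t : pvC) (res : PySem.Dict (Option pvC) Int) : Prop :=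
  (∀ (x : pvC) (d : Int), res.get? (some x) = some d →
      ∃ j : Nat, d = (j : Int) ∧ pvDistEq g x t j)
  ∧ (∀ (x : pvC) (j : Nat), pvSteps g j x t → res.contains (some x) = true)
  ∧ (∀ y, res.contains y = true → ∃ x : pvC, y = some x)

lemma pv_bfsB_empty (g : List (List Char)) (t : pvC) (k : Nat)
    (dist : PySem.Dict (Option pvC) Int) (h : pvInvB g t k dist []) : pvOutB g t dist := by
  refine ⟨?_, ?_, h.hsome⟩
  · intro x d hd
    obtain ⟨j, hj, _, hde⟩ := h.hval x d hd
    exact ⟨j, hj, hde⟩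
  · intro x j hst
    obtain ⟨j', hj', hde⟩ := pv_exists_distEq g x t j hst
    have hjk : j' ≤ k := by
      by_contra hgt
      push Not at hgt
      obtain ⟨y, hy⟩ := pv_distEq_down g t j' k (le_of_lt hgt) ⟨x, hde⟩
      exact absurd ((h.hfr y).mpr hy) (by simp)
    exact h.hcompl x j' hjk hde.1

lemma pv_bfsB_run (g : List (List Char)) (t : pvC) (ht : pvInB g t) :
    ∀ (fuel k : Nat) (dist : PySem.Dict (Option pvC) Int) (frontier : List pvC),
      pvInvB g t k dist frontier →
      ((pvCells g).filter (fun x => !(dist.contains (some x)))).length + 2 ≤ fuel →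
      pvOutB g t (pvRevBfs g (pvHg g) (pvWg g) fuel dist frontier (k : Int)) := by
  intro fuel
  induction fuel with
  | zero => intro k dist frontier _ hfuel; omega
  | succ fuel ih =>
    intro k dist frontier hinv hfuel
    by_cases hfe : frontier.isEmpty
    · rw [pvRevBfs, if_pos hfe]
      exact pv_bfsB_empty g t k dist (List.isEmpty_iff.mp hfe ▸ hinv)
    · simp only [pvRevBfs]
      rw [if_neg hfe]
      rw [pv_foldl_nested frontier pvNbrs
        (fun (st : PySem.Dict (Option pvC) Int × List pvC) (pr : pvC × pvC) =>
          if 0 ≤ pr.2.1 ∧ pr.2.1 < pvHg g ∧ 0 ≤ pr.2.2 ∧ pr.2.2 < pvWg g ∧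
              st.1.contains (some pr.2) = false ∧
              pvHeight (pvAt g pr.1.1 pr.1.2) - pvHeight (pvAt g pr.2.1 pr.2.2) ≤ 1 then
            (st.1.insert (some pr.2) ((k : Int) + 1), st.2 ++ [pr.2])
          else st) (dist, [])]
      obtain ⟨Δ, heq, hΔnd, hΔmem⟩ := pv_grow g ((k : Int) + 1)
        (frontier.flatMap (fun x => (pvNbrs x).map (fun y => (x, y)))) dist []
      rw [heq]
      simp only [List.nil_append]
      have hprs : ∀ u x : pvC,
          ((u, x) ∈ frontier.flatMap (fun x => (pvNbrs x).map (fun y => (x, y)))) ↔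
          (u ∈ frontier ∧ x ∈ pvNbrs u) := by
        intro u x
        simp only [List.mem_flatMap, List.mem_map, Prod.mk.injEq]
        constructor
        · rintro ⟨a, ha, y, hy, rfl, rfl⟩; exact ⟨ha, hy⟩
        · rintro ⟨hu, hx⟩; exact ⟨u, hu, x, hx, rfl, rfl⟩
      have hΔiff : ∀ x : pvC, x ∈ Δ ↔ pvDistEq g x t (k + 1) := by
        intro x
        rw [hΔmem x]
        constructor
        · rintro ⟨hcx, u, hu, h1, h2, h3, h4, h5⟩
          obtain ⟨hufr, hunb⟩ := (hprs u x).mp hu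
          have hdu : pvDistEq g u t k := (hinv.hfr u).mp hufr
          have hinbu : pvInB g u := pv_src_inB g t ht k u hdu.1
          have hadj : pvAdj g x u :=
            ⟨⟨h1, h2, h3, h4⟩, hinbu, (pv_nbrs_symm u x).mp hunb, h5⟩
          refine ⟨⟨u, hadj, hdu.1⟩, fun j hj hstj => ?_⟩
          have : dist.contains (some x) = true := hinv.hcompl x j (Nat.lt_succ_iff.mp hj) hstj
          rw [hcx] at this; exact absurd this (by simp)
        · rintro ⟨hst, hmin⟩
          have hcx : dist.contains (some x) = false := by
            by_contra hc
            have hc' : dist.contains (some x) = true := by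
              cases h : dist.contains (some x)
              · exact absurd h hc
              · rfl
            obtain ⟨v, hv⟩ : ∃ v, dist.get? (some x) = some v := by
              rw [PySem.Dict.contains_eq_isSome_get?] at hc'
              exact Option.isSome_iff_exists.mp hc'
            obtain ⟨j, _, hjk, hdj⟩ := hinv.hval x v hv
            exact hmin j (Nat.lt_succ_of_le hjk) hdj.1
          obtain ⟨m, hadj, hstm⟩ := hst
          obtain ⟨jm, hjmle, hdm⟩ := pv_exists_distEq g m t k hstm
          have hjm : jm = k := by
            by_contra hne
            have hlt : jm < k := lt_of_le_of_ne hjmle hne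
            exact hmin (jm + 1) (Nat.succ_lt_succ hlt) ⟨m, hadj, hdm.1⟩
          subst hjm
          refine ⟨hcx, m, (hprs m x).mpr ⟨(hinv.hfr m).mpr hdm, (pv_nbrs_symm x m).mp hadj.2.2.1⟩,
            hadj.1.1, hadj.1.2.1, hadj.1.2.2.1, hadj.1.2.2.2, hadj.2.2.2⟩
      have hcast : ((k : Int) + 1) = ((k + 1 : Nat) : Int) := by push_cast; ring
      set dist' := Δ.foldl (fun d x => d.insert (some x) ((k : Int) + 1)) dist with hdist'
      have hfoldmap : dist' = (Δ.map some).foldl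
          (fun d y => d.insert y ((k : Int) + 1)) dist := by
        rw [hdist', List.foldl_map]
      have hget' : ∀ y, dist'.get? y
          = if y ∈ Δ.map some then some ((k : Int) + 1) else dist.get? y := by
        intro y
        rw [hfoldmap, pv_get?_insertAll]
      have hcon' : ∀ y, dist'.contains y
          = (decide (y ∈ Δ.map some) || dist.contains y) := by
        intro y
        rw [hfoldmap, pv_contains_insertAll]
      have hmemsome : ∀ x : pvC, ((some x) ∈ Δ.map some) ↔ x ∈ Δ := by
        intro x
        simp
      have hinv' : pvInvB g t (k + 1) dist' Δ := by
        refine ⟨hΔiff, hΔnd, ?_, ?_, ?_, ?_, ?_⟩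
        · rw [hfoldmap]
          exact PySem.Dict.nodup_keys_foldl_insert _ (fun _ _ => ((k : Int) + 1)) dist
            hinv.hkeys
        · intro y hy
          rw [hcon'] at hy
          rcases Bool.or_eq_true_iff.mp hy with h | h
          · obtain ⟨x, _, hx⟩ := List.mem_map.mp (of_decide_eq_true h)
            exact ⟨x, hx.symm⟩
          · exact hinv.hsome y h
        · intro x d hd
          rw [hget'] at hd
          by_cases hx : (some x : Option pvC) ∈ Δ.map some
          · rw [if_pos hx] at hd
            refine ⟨k + 1, ?_, le_refl _, (hΔiff x).mp ((hmemsome x).mp hx)⟩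
            rw [← hcast]
            exact (Option.some_inj.mp hd).symm
          · rw [if_neg hx] at hd
            obtain ⟨j, h1, h2, h3⟩ := hinv.hval x d hd
            exact ⟨j, h1, Nat.le_succ_of_le h2, h3⟩
        · intro x j hjle hstx
          rw [hcon']
          rcases Nat.lt_or_ge j (k + 1) with hlt | hge
          · rw [hinv.hcompl x j (Nat.lt_succ_iff.mp hlt) hstx]
            simp
          · have hjeq : j = k + 1 := le_antisymm hjle hge
            subst hjeq
            obtain ⟨j', hj'le, hd'⟩ := pv_exists_distEq g x t (k + 1) hstx
            rcases Nat.lt_or_ge j' (k + 1) with hlt' | hge'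
            · rw [hinv.hcompl x j' (Nat.lt_succ_iff.mp hlt') hd'.1]
              simp
            · have : j' = k + 1 := le_antisymm hj'le hge'
              subst this
              rw [decide_eq_true ((hmemsome x).mpr ((hΔiff x).mpr hd'))]
              simp
        · intro x hcx
          rw [hcon'] at hcx
          rcases Bool.or_eq_true_iff.mp hcx with h | h
          · have hxΔ : x ∈ Δ := (hmemsome x).mp (of_decide_eq_true h)
            obtain ⟨_, u, _, h1, h2, h3, h4, _⟩ := (hΔmem x).mp hxΔ
            exact (pv_mem_cells g x).mpr ⟨h1, h2, h3, h4⟩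
          · exact hinv.hkeycell x h
      by_cases hΔe : Δ = []
      · rw [hdist', hΔe]
        simp only [List.foldl_nil]
        cases fuel with
        | zero => omega
        | succ fuel' =>
          rw [hcast, pvRevBfs, if_pos (by simp)]
          have hinv'' := hinv'
          rw [hdist', hΔe] at hinv''
          simp only [List.foldl_nil] at hinv''
          exact pv_bfsB_empty g t (k + 1) dist (by simpa using hinv'')
      · have hcount := pv_countDrop (pvCells g) Δ (fun x => !(dist.contains (some x)))
          (pv_cells_nodup g) hΔnd
          (fun x hx => by
            obtain ⟨hcx, u, _, h1, h2, h3, h4, _⟩ := (hΔmem x).mp hx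
            exact ⟨(pv_mem_cells g x).mpr ⟨h1, h2, h3, h4⟩, by simp [hcx]⟩)
        have hfilter_eq :
            (pvCells g).filter (fun x => !(dist'.contains (some x)))
            = (pvCells g).filter (fun x => !(dist.contains (some x)) && !Δ.contains x) := by
          apply List.filter_congr
          intro x _
          rw [hcon']
          by_cases hx : x ∈ Δ
          · simp [hx]
          · have : (some x : Option pvC) ∉ Δ.map some := fun h => hx ((hmemsome x).mp h)
            simp [hx, this]
        have hΔlen : 1 ≤ Δ.length := by
          cases Δ with
          | nil => exact absurd rfl hΔe
          | cons a l => simp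
        rw [hcast]
        apply ih (k + 1) _ Δ hinv'
        rw [hfilter_eq]
        beta_reduce at hcount
        omega

lemma pv_bfsB_eval (g : List (List Char)) (t : pvC) (ht : pvInB g t) :
    (∀ x : pvC, pvDistInt g x t
      ((pvRevBfs g (pvHg g) (pvWg g) (g.length * (g.headD []).length + 2)
        (PySem.Dict.empty.insert (some t) 0) [t] 0).getD (some x) 100000000))
    ∧ (pvRevBfs g (pvHg g) (pvWg g) (g.length * (g.headD []).length + 2)
        (PySem.Dict.empty.insert (some t) 0) [t] 0).get? none = none := by
  have hget0 : ∀ y : Option pvC, (PySem.Dict.empty.insert (some t) (0 : Int)).get? y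
      = if y = some t then some (0 : Int) else none := by
    intro y
    by_cases hy : y = some t
    · subst hy; simp [PySem.Dict.get?_insert_self]
    · rw [PySem.Dict.get?_insert_of_ne (hne := hy)]
      simp [PySem.Dict.get?_empty, hy]
  have hinv : pvInvB g t 0 (PySem.Dict.empty.insert (some t) 0) [t] := by
    refine ⟨?_, by simp, ?_, ?_, ?_, ?_, ?_⟩
    · intro x
      simp only [List.mem_singleton]
      constructor
      · rintro rfl
        exact ⟨rfl, fun j hj => absurd hj (Nat.not_lt_zero j)⟩
      · rintro ⟨hst, _⟩
        exact hst
    · exact PySem.Dict.nodup_keys_insert _ _ _ (PySem.Dict.nodup_keys_empty)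
    · intro y hy
      rw [PySem.Dict.contains_eq_isSome_get?, hget0 y] at hy
      by_cases hy' : y = some t
      · exact ⟨t, hy'⟩
      · rw [if_neg hy'] at hy
        simp at hy
    · intro x d hd
      rw [hget0 (some x)] at hd
      by_cases hx : (some x : Option pvC) = some t
      · rw [if_pos hx] at hd
        have hxt : x = t := Option.some_inj.mp hx
        refine ⟨0, by simpa using hd.symm, le_refl 0, ?_⟩
        subst hxt
        exact ⟨rfl, fun j hj => absurd hj (Nat.not_lt_zero j)⟩
      · rw [if_neg hx] at hd
        exact absurd hd (by simp)
    · intro x j hj hst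
      have hj0 : j = 0 := Nat.le_zero.mp hj
      subst hj0
      have hx : x = t := hst
      subst hx
      rw [PySem.Dict.contains_eq_isSome_get?, hget0 (some x), if_pos rfl]
      rfl
    · intro x hc
      rw [PySem.Dict.contains_eq_isSome_get?, hget0 (some x)] at hc
      by_cases hx : (some x : Option pvC) = some t
      · exact (Option.some_inj.mp hx) ▸ (pv_mem_cells g t).mpr ht
      · rw [if_neg hx] at hc
        simp at hc
  have hrun := pv_bfsB_run g t ht (g.length * (g.headD []).length + 2) 0
    (PySem.Dict.empty.insert (some t) 0) [t] hinv
    (by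
      have h1 : ((pvCells g).filter
          (fun x => !((PySem.Dict.empty.insert (some t) 0).contains (some x)))).length
          ≤ (pvCells g).length := List.length_filter_le _ _
      have h2 := pv_cells_length g
      exact Nat.add_le_add_right (h2 ▸ h1) 2)
  obtain ⟨hP1, hP2, hP3⟩ := hrun
  have hres0 : pvRevBfs g (pvHg g) (pvWg g) (g.length * (g.headD []).length + 2)
        (PySem.Dict.empty.insert (some t) 0) [t] 0
      = pvRevBfs g (pvHg g) (pvWg g) (g.length * (g.headD []).length + 2)
        (PySem.Dict.empty.insert (some t) 0) [t] ((0 : Nat) : Int) := rfl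
  set res := pvRevBfs g (pvHg g) (pvWg g) (g.length * (g.headD []).length + 2)
    (PySem.Dict.empty.insert (some t) 0) [t] ((0 : Nat) : Int) with hres
  constructor
  · intro x
    rw [hres0]
    by_cases hreach : ∃ j : Nat, pvSteps g j x t
    · obtain ⟨j, hj⟩ := hreach
      have hc := hP2 x j hj
      obtain ⟨v, hv⟩ : ∃ v, res.get? (some x) = some v := by
        rw [PySem.Dict.contains_eq_isSome_get?] at hc
        exact Option.isSome_iff_exists.mp hc
      obtain ⟨j', hj', hd'⟩ := hP1 x v hv
      have hgd : res.getD (some x) 100000000 = v := by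
        rw [PySem.Dict.getD_eq_get?_getD, hv]
        rfl
      rw [hgd]
      exact Or.inl ⟨j', hj', hd'⟩
    · have hgetn : res.get? (some x) = none := by
        cases hg : res.get? (some x) with
        | none => rfl
        | some v =>
          obtain ⟨j', _, hd'⟩ := hP1 x v hg
          exact absurd ⟨j', hd'.1⟩ hreach
      have hgd : res.getD (some x) 100000000 = 100000000 := by
        rw [PySem.Dict.getD_eq_get?_getD, hgetn]
        rfl
      rw [hgd]
      exact Or.inr ⟨rfl, fun j hj => hreach ⟨j, hj⟩⟩
  · rw [hres0]
    cases hg : res.get? none with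
    | none => rfl
    | some v =>
      have hcon : res.contains none = true := by
        rw [PySem.Dict.contains_eq_isSome_get?, hg]; rfl
      obtain ⟨x, hx⟩ := hP3 none hcon
      exact absurd hx (by simp)

-- ---------- normalisation of the two programs ----------

lemma pv_W_if (g : List (List Char)) :
    (if 0 < g.length then ((g.headD []).length : Int) else 0) = pvWg g := by
  cases g with
  | nil => simp [pvWg]
  | cons x xs => simp [pvWg]

lemma pv_build_eq (g : List (List Char)) :
    pvBuildGraph g =
      ((pvCells g).foldl (fun d p => pvGraphCell g (pvHg g) (pvWg g) p.1 p.2 d)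
        PySem.Dict.empty,
       (pvCells g).foldl (fun se p => pvScanCell g p.1 p.2 se) (none, none)) := by
  show (PySem.List.pyRange 0 (pvHg g) 1).foldl (fun st row =>
      (PySem.List.pyRange 0 (pvWg g) 1).foldl (fun st col =>
        (pvGraphCell g (pvHg g) (pvWg g) row col st.1, pvScanCell g row col st.2)) st)
      (PySem.Dict.empty, (none, none)) = _
  rw [pv_foldl_nested (PySem.List.pyRange 0 (pvHg g) 1)
    (fun _ => PySem.List.pyRange 0 (pvWg g) 1)
    (fun st pr => (pvGraphCell g (pvHg g) (pvWg g) pr.1 pr.2 st.1,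
      pvScanCell g pr.1 pr.2 st.2))
    (PySem.Dict.empty, (none, none))]
  show (pvCells g).foldl _ _ = _
  rw [PySem.List.foldl_prod_mk
    (f := fun dd (pr : pvC) => pvGraphCell g (pvHg g) (pvWg g) pr.1 pr.2 dd)
    (g := fun se (pr : pvC) => pvScanCell g pr.1 pr.2 se)]

lemma pv_graphCell_getD (g : List (List Char)) (r c : Int)
    (d : PySem.Dict (Option pvC) (List pvC)) (y : Option pvC) :
    (pvGraphCell g (pvHg g) (pvWg g) r c d).getD y []
      = if y = some (r, c) then d.getD y [] ++ pvAdjList g (r, c) else d.getD y [] := by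
  have aux : ∀ (ns : List pvC) (d : PySem.Dict (Option pvC) (List pvC)),
      (ns.foldl (fun gr nb =>
        if nb.1 < 0 ∨ pvHg g ≤ nb.1 ∨ nb.2 < 0 ∨ pvWg g ≤ nb.2 then gr
        else if pvHeight (pvAt g nb.1 nb.2) - pvHeight (pvAt g r c) ≤ 1 then
          gr.insert (some (r, c)) (gr.getD (some (r, c)) [] ++ [nb])
        else gr) d).getD y []
      = if y = some (r, c) then
          d.getD y [] ++ ns.filter (fun nb =>
            decide (0 ≤ nb.1 ∧ nb.1 < pvHg g ∧ 0 ≤ nb.2 ∧ nb.2 < pvWg g) &&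
            decide (pvHtAt g nb - pvHtAt g (r, c) ≤ 1))
        else d.getD y [] := by
    intro ns
    induction ns with
    | nil => intro d; by_cases hy : y = some (r, c) <;> simp [hy]
    | cons nb ns ih =>
      intro d
      simp only [List.foldl_cons, List.filter_cons]
      by_cases hbad : nb.1 < 0 ∨ pvHg g ≤ nb.1 ∨ nb.2 < 0 ∨ pvWg g ≤ nb.2
      · rw [if_pos hbad, ih d]
        have hfil : (decide (0 ≤ nb.1 ∧ nb.1 < pvHg g ∧ 0 ≤ nb.2 ∧ nb.2 < pvWg g) &&
            decide (pvHtAt g nb - pvHtAt g (r, c) ≤ 1)) = false := by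
          simp only [Bool.and_eq_false_iff, decide_eq_false_iff_not]
          left; intro h; rcases h with ⟨h1, h2, h3, h4⟩; omega
        rw [hfil]
        simp
      · rw [if_neg hbad]
        by_cases hht : pvHeight (pvAt g nb.1 nb.2) - pvHeight (pvAt g r c) ≤ 1
        · rw [if_pos hht, ih _]
          have hfil : (decide (0 ≤ nb.1 ∧ nb.1 < pvHg g ∧ 0 ≤ nb.2 ∧ nb.2 < pvWg g) &&
              decide (pvHtAt g nb - pvHtAt g (r, c) ≤ 1)) = true := by
            simp only [Bool.and_eq_true, decide_eq_true_eq]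
            exact ⟨by omega, hht⟩
          rw [hfil]
          by_cases hy : y = some (r, c)
          · subst hy
            rw [if_pos rfl, if_pos rfl]
            rw [PySem.Dict.getD_insert_self]
            simp
          · rw [if_neg hy, if_neg hy]
            rw [PySem.Dict.getD_insert_of_ne (hne := hy)]
        · rw [if_neg hht, ih d]
          have hfil : (decide (0 ≤ nb.1 ∧ nb.1 < pvHg g ∧ 0 ≤ nb.2 ∧ nb.2 < pvWg g) &&
              decide (pvHtAt g nb - pvHtAt g (r, c) ≤ 1)) = false := by
            simp only [Bool.and_eq_false_iff, decide_eq_false_iff_not]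
            right; exact fun h => hht h
          rw [hfil]
          simp
  exact aux (pvNbrs (r, c)) d

lemma pv_graph_getD (g : List (List Char)) :
    ∀ (l : List pvC), l.Nodup →
      ∀ (d : PySem.Dict (Option pvC) (List pvC)),
        (∀ q : pvC,
          (l.foldl (fun d p => pvGraphCell g (pvHg g) (pvWg g) p.1 p.2 d) d).getD (some q) []
            = if q ∈ l then d.getD (some q) [] ++ pvAdjList g q else d.getD (some q) [])
        ∧ (l.foldl (fun d p => pvGraphCell g (pvHg g) (pvWg g) p.1 p.2 d) d).getD none []
            = d.getD none [] := by
  intro l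
  induction l with
  | nil => intro _ d; simp
  | cons p l ih =>
    intro hnd d
    obtain ⟨hp, hl⟩ := List.nodup_cons.mp hnd
    obtain ⟨ih1, ih2⟩ := ih hl (pvGraphCell g (pvHg g) (pvWg g) p.1 p.2 d)
    constructor
    · intro q
      simp only [List.foldl_cons, ih1 q]
      have hcell := pv_graphCell_getD g p.1 p.2 d (some q)
      by_cases hq : q ∈ l
      · have hqp : q ≠ p := fun h => hp (h ▸ hq)
        rw [if_pos hq, if_pos (List.mem_cons_of_mem _ hq)]
        rw [hcell, if_neg (by simp [hqp])]
      · by_cases hqp : q = p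
        · subst hqp
          rw [if_neg hq, if_pos List.mem_cons_self, hcell, if_pos (by simp)]
        · rw [if_neg hq, if_neg (by simp [hqp, hq]), hcell, if_neg (by simp [hqp])]
    · simp only [List.foldl_cons, ih2]
      rw [pv_graphCell_getD g p.1 p.2 d none, if_neg (by simp)]

lemma pv_graph_spec (g : List (List Char)) :
    (∀ p : pvC,
      ((pvCells g).foldl (fun d p => pvGraphCell g (pvHg g) (pvWg g) p.1 p.2 d)
        PySem.Dict.empty).getD (some p) []
        = if p ∈ pvCells g then pvAdjList g p else [])
    ∧ ((pvCells g).foldl (fun d p => pvGraphCell g (pvHg g) (pvWg g) p.1 p.2 d)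
        PySem.Dict.empty).getD none [] = [] := by
  obtain ⟨h1, h2⟩ := pv_graph_getD g (pvCells g) (pv_cells_nodup g) PySem.Dict.empty
  constructor
  · intro p
    rw [h1 p]
    by_cases hp : p ∈ pvCells g
    · simp [hp]
    · simp [hp]
  · simpa using h2

lemma pv_scan_mem (g : List (List Char)) :
    ∀ (l : List pvC) (se : Option pvC × Option pvC),
      (∀ p : pvC, ((l.foldl (fun se p => pvScanCell g p.1 p.2 se) se).1 = some p →
        p ∈ l ∨ se.1 = some p))
      ∧ (∀ p : pvC, ((l.foldl (fun se p => pvScanCell g p.1 p.2 se) se).2 = some p →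
        p ∈ l ∨ se.2 = some p)) := by
  intro l
  induction l with
  | nil => intro se; constructor <;> intro p h <;> exact Or.inr h
  | cons x l ih =>
    intro se
    constructor
    · intro p h
      rcases (ih (pvScanCell g x.1 x.2 se)).1 p h with hmem | hse
      · exact Or.inl (List.mem_cons_of_mem _ hmem)
      · simp only [pvScanCell] at hse
        split at hse
        · exact Or.inl (by simp at hse; simp [← hse])
        · split at hse
          · exact Or.inr hse
          · exact Or.inr hse
    · intro p h
      rcases (ih (pvScanCell g x.1 x.2 se)).2 p h with hmem | hse
      · exact Or.inl (List.mem_cons_of_mem _ hmem)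
      · simp only [pvScanCell] at hse
        split at hse
        · exact Or.inr hse
        · split at hse
          · exact Or.inl (by simp at hse; simp [← hse])
          · exact Or.inr hse

lemma pv_find_eq (g : List (List Char)) (search : String) :
    pvFindCoords g search
      = (pvCells g).filter (fun p => decide (String.ofList [pvAt g p.1 p.2] = search)) := by
  show (PySem.List.pyRange 0 (pvHg g) 1).foldl (fun res row =>
      (PySem.List.pyRange 0 (pvWg g) 1).foldl (fun res col =>
        if String.ofList [pvAt g row col] = search then res ++ [(row, col)] else res) res)
      ([] : List pvC) = _
  rw [pv_foldl_nested (PySem.List.pyRange 0 (pvHg g) 1)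
    (fun _ => PySem.List.pyRange 0 (pvWg g) 1)
    (fun (res : List pvC) (pr : pvC) =>
      if String.ofList [pvAt g pr.1 pr.2] = search then res ++ [pr] else res)
    ([] : List pvC)]
  show (pvCells g).foldl _ _ = _
  rw [PySem.List.foldl_append_ite_eq_filter]
  simp

lemma pv_scanB_eq (g : List (List Char)) :
    (PySem.List.pyRange 0 (g.length : Int) 1).foldl (fun se row =>
      (PySem.List.pyRange 0 (if 0 < g.length then ((g.headD []).length : Int) else 0) 1).foldl
        (fun se col => pvScanCell g row col se) se)
      ((none : Option pvC), (none : Option pvC))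
    = (pvCells g).foldl (fun se p => pvScanCell g p.1 p.2 se) (none, none) := by
  rw [pv_W_if]
  show (PySem.List.pyRange 0 (pvHg g) 1).foldl (fun se row =>
      (PySem.List.pyRange 0 (pvWg g) 1).foldl (fun se col => pvScanCell g row col se) se)
      ((none : Option pvC), (none : Option pvC)) = _
  rw [pv_foldl_nested (PySem.List.pyRange 0 (pvHg g) 1)
    (fun _ => PySem.List.pyRange 0 (pvWg g) 1)
    (fun (se : Option pvC × Option pvC) (pr : pvC) => pvScanCell g pr.1 pr.2 se)
    ((none : Option pvC), (none : Option pvC))]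
  rfl

lemma pv_bestB_eq (g : List (List Char)) (sc : String) (D : pvC → Int) (b0 : Int) :
    (PySem.List.pyRange 0 (g.length : Int) 1).foldl (fun best row =>
      (PySem.List.pyRange 0 (pvWg g) 1).foldl
        (fun best col =>
          if String.ofList [pvAt g row col] = sc ∧ D (row, col) < best then D (row, col)
          else best) best) b0
    = (pvCells g).foldl (fun best p =>
        if String.ofList [pvAt g p.1 p.2] = sc ∧ D p < best then D p else best) b0 := by
  show (PySem.List.pyRange 0 (pvHg g) 1).foldl (fun best row =>
      (PySem.List.pyRange 0 (pvWg g) 1).foldl (fun best col =>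
        if String.ofList [pvAt g row col] = sc ∧ D (row, col) < best then D (row, col)
        else best) best) b0 = _
  rw [pv_foldl_nested (PySem.List.pyRange 0 (pvHg g) 1)
    (fun _ => PySem.List.pyRange 0 (pvWg g) 1)
    (fun (best : Int) (pr : pvC) =>
      if String.ofList [pvAt g pr.1 pr.2] = sc ∧ D pr < best then D pr else best) b0]
  rfl

-- B's guarded running-min loop is the running minimum of the guarded values
lemma pv_guardmin_eq {P : pvC → Prop} [DecidablePred P] (D : pvC → Int) :
    ∀ (l : List pvC) (b0 : Int),
      l.foldl (fun best p => if P p ∧ D p < best then D p else best) b0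
        = (l.filter (fun p => decide (P p))).foldl (fun b p => min b (D p)) b0 := by
  intro l
  induction l with
  | nil => intro b0; rfl
  | cons x xs ih =>
    intro b0
    simp only [List.foldl_cons, List.filter_cons]
    by_cases h1 : P x
    · simp only [decide_eq_true h1, if_true, List.foldl_cons]
      by_cases h2 : D x < b0
      · rw [if_pos ⟨h1, h2⟩, ih, min_eq_right (le_of_lt h2)]
      · rw [if_neg (by tauto), ih, min_eq_left (not_lt.mp h2)]
    · have : decide (P x) = false := decide_eq_false h1
      rw [this, if_neg (by tauto)]
      simp only [Bool.false_eq_true, if_false]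
      exact ih b0

-- the guarded running-min loop keeps its seed when no value beats it
lemma pv_guardmin_keep {P : pvC → Prop} [DecidablePred P] (D : pvC → Int)
    (l : List pvC) (b0 : Int) (h : ∀ p ∈ l, ¬ D p < b0) :
    l.foldl (fun best p => if P p ∧ D p < best then D p else best) b0 = b0 := by
  induction l with
  | nil => rfl
  | cons x xs ih =>
    simp only [List.foldl_cons]
    rw [if_neg (fun hc => h x List.mem_cons_self hc.2)]
    exact ih (fun p hp => h p (List.mem_cons_of_mem _ hp))

-- ===== VERDICT (by name: the statement is the Claim_ definition above) =====
theorem min_steps_to_top_spec : Claim_equal_min_steps_to_top := by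
  intro heightmap start_char _ hPre
  unfold Spec_min_steps_to_top
  simp only [min_steps_to_top, min_steps_to_top_alt]
  set g : List (List Char) := heightmap.map (fun line => line.toList) with hg
  rw [pv_build_eq g, pv_scanB_eq g]
  simp only
  set graph := (pvCells g).foldl (fun d p => pvGraphCell g (pvHg g) (pvWg g) p.1 p.2 d)
    PySem.Dict.empty with hgraphdef
  set se := (pvCells g).foldl (fun se p => pvScanCell g p.1 p.2 se) (none, none) with hse
  obtain ⟨hgr, hgrnone⟩ := pv_graph_spec g
  rw [← hgraphdef] at hgr hgrnone
  have hsmem : ∀ p : pvC, se.1 = some p → p ∈ pvCells g := by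
    intro p hp
    rcases ((pv_scan_mem g (pvCells g) (none, none)).1 p hp) with h | h
    · exact h
    · exact absurd h (by simp)
  have hemem : ∀ p : pvC, se.2 = some p → p ∈ pvCells g := by
    intro p hp
    rcases ((pv_scan_mem g (pvCells g) (none, none)).2 p hp) with h | h
    · exact h
    · exact absurd h (by simp)
  rcases hE : se.2 with _ | t
  · -- no end cell was scanned: every forward BFS misses, and B's dict is just {None: 0}
    have hVnone : ∀ cc : pvC, cc ∈ pvCells g →
        pvBfs (g.length * (g.headD []).length) graph (some cc) none = 100000000 := by
      intro cc hcc
      exact (pv_bfsA_eval g graph none cc hgr hcc).2 rfl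
    have hB : ∀ y : Option pvC,
        ((PySem.Dict.empty.insert (none : Option pvC) (0 : Int))).getD y 100000000
          = if y = none then 0 else 100000000 := by
      intro y
      by_cases hy : y = none
      · subst hy
        rw [PySem.Dict.getD_insert_self]
        simp
      · rw [PySem.Dict.getD_insert_of_ne (hne := hy)]
        rw [PySem.Dict.getD_eq_get?_getD, PySem.Dict.get?_empty]
        simp [hy]
    have hv0 : pvBfs (g.length * (g.headD []).length) graph se.1 none
        = if se.1 = none then 0 else 100000000 := by
      rcases hS : se.1 with _ | cS
      · rw [pv_bfs_none g _ graph hgrnone none]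
      · rw [hVnone cS (hsmem cS hS)]
        simp
    have hB0 : ((PySem.Dict.empty.insert (none : Option pvC) (0 : Int))).getD se.1 100000000
        = if se.1 = none then 0 else 100000000 := by
      rw [hB se.1]
    by_cases hsc : start_char = "S"
    · rw [if_neg (by simp [hsc]), if_pos hsc]
      rw [hv0, hB0]
    · rw [if_pos (by simp [hsc]), if_neg hsc]
      rw [List.map_append, List.map_map, List.map_cons, List.map_nil, pv_minq]
      rw [hv0]
      rw [pv_foldl_min_of_le _ _ ?_]
      · rw [pv_W_if g]
        rw [pv_bestB_eq g start_char
          (fun p => (PySem.Dict.empty.insert (none : Option pvC) (0 : Int)).getD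
            (some p) 100000000)]
        rw [eq_comm, hB0]
        apply pv_guardmin_keep
        intro p _
        intro hlt
        rw [hB (some p)] at hlt
        have h1 : (if (some p : Option pvC) = none then (0 : Int) else 100000000)
            = 100000000 := by simp
        rw [h1] at hlt
        revert hlt
        split <;> omega
      · intro y hy
        obtain ⟨cc, hcc, hccy⟩ := List.mem_map.mp hy
        have hccells : cc ∈ pvCells g := by
          rw [pv_find_eq g start_char] at hcc
          exact List.mem_of_mem_filter hcc
        have : y = 100000000 := by
          rw [← hccy]
          exact hVnone cc hccells
        rw [this]
        split <;> omega
  · -- an end cell t was scanned: one backward BFS equals every forward BFS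
    have htc : t ∈ pvCells g := hemem t hE
    have ht : pvInB g t := (pv_mem_cells g t).mp htc
    obtain ⟨hD, hDnone⟩ := pv_bfsB_eval g t ht
    simp only [pvHg] at hD hDnone
    have hA : ∀ cc : pvC, cc ∈ pvCells g →
        pvBfs (g.length * (g.headD []).length) graph (some cc) (some t)
          = (pvRevBfs g ((g.length : Int)) (pvWg g) (g.length * (g.headD []).length + 2)
              (PySem.Dict.empty.insert (some t) 0) [t] 0).getD (some cc) 100000000 := by
      intro cc hcc
      exact pvDistInt_unique g cc t _ _
        ((pv_bfsA_eval g graph (some t) cc hgr hcc).1 t rfl) (hD cc)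
    rw [pv_W_if g]
    have hbest0 : pvBfs (g.length * (g.headD []).length) graph se.1 (some t)
        = (pvRevBfs g ((g.length : Int)) (pvWg g) (g.length * (g.headD []).length + 2)
            (PySem.Dict.empty.insert (some t) 0) [t] 0).getD se.1 100000000 := by
      rcases hS : se.1 with _ | cS
      · rw [pv_bfs_none g _ graph hgrnone (some t)]
        rw [PySem.Dict.getD_eq_get?_getD, hDnone]
        simp
      · exact hA cS (hsmem cS hS)
    by_cases hsc : start_char = "S"
    · rw [if_neg (by simp [hsc]), if_pos hsc]
      exact hbest0
    · rw [if_pos (by simp [hsc]), if_neg hsc]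
      rw [pv_bestB_eq g start_char
        (fun p => (pvRevBfs g ((g.length : Int)) (pvWg g)
          (g.length * (g.headD []).length + 2)
          (PySem.Dict.empty.insert (some t) 0) [t] 0).getD (some p) 100000000)]
      rw [List.map_append, List.map_map, List.map_cons, List.map_nil, pv_minq]
      rw [List.foldl_map]
      rw [pv_guardmin_eq (P := fun p : pvC => String.ofList [pvAt g p.1 p.2] = start_char)]
      rw [← pv_find_eq g start_char]
      rw [hbest0]
      apply PySem.List.foldl_congr_mem
      intro acc cc hcc
      have hccells : cc ∈ pvCells g := by
        rw [pv_find_eq g start_char] at hcc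
        exact List.mem_of_mem_filter hcc
      show min acc (pvBfs (g.length * (g.headD []).length) graph (some cc) (some t)) = _
      rw [hA cc hccells]
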